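-- pv_equiv track=rewrite | github.com/SpaceWJK/Slack-Bot | tools/mcp-cache-layer/scripts/diagnose_regression_v2.py | find_lost_content
-- ===== SOURCE A (Python) =====
-- import difflib
--
-- def find_lost_content(old_text, new_text):
--     """기존에만 있고 신규에 없는 텍스트 블록 추출."""
--     old_lines = old_text.split('\n')
--     new_lines = new_text.split('\n')
--
--     diff = difflib.unified_diff(new_lines, old_lines, n=0)
--
--     lost_blocks = []
--     for line in diff:
--         if line.startswith('+') and not line.startswith('+++'):
--             content = line[1:].strip()
--             if content and len(content) > 5:
--                 lost_blocks.append(content)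
--     return lost_blocks
-- ===== SOURCE B (Python) =====
-- def find_lost_content(old_text, new_text):
--     """Lines present in old_text but not matched in new_text."""
--     old_lines = old_text.split('\n')
--     new_lines = new_text.split('\n')
--
--     def longest_common_run(nlo, nhi, olo, ohi):
--         # longest run of consecutive equal lines between the two windows,
--         # scanning forward so the earliest maximal run wins
--         best_n, best_o, best_len = nlo, olo, 0
--         prev = [0] * (ohi - olo)
--         for i in range(nlo, nhi):
--             cur = [0] * (ohi - olo)
--             for j in range(olo, ohi):
--                 if new_lines[i] == old_lines[j]:
--                     run = (prev[j - olo - 1] if j > olo else 0) + 1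
--                     cur[j - olo] = run
--                     if run > best_len:
--                         best_n, best_o, best_len = i - run + 1, j - run + 1, run
--             prev = cur
--         return best_n, best_o, best_len
--
--     lost_blocks = []
--     windows = [(0, len(new_lines), 0, len(old_lines))]
--     while windows:
--         nlo, nhi, olo, ohi = windows.pop()
--         ni, oj, k = longest_common_run(nlo, nhi, olo, ohi)
--         if k == 0:
--             for line in old_lines[olo:ohi]:
--                 content = line.strip()
--                 if content and len(content) > 5:
--                     lost_blocks.append(content)
--         else:
--             windows.append((ni + k, nhi, oj + k, ohi))
--             windows.append((nlo, ni, olo, oj))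
--     return lost_blocks
-- ===== Notes on version B (the rewrite author's own statement) =====
-- stated objective: alternative
-- what changed: B computes the diff itself with a dynamic-programming longest-common-run matcher and a worklist over (new,old) window pairs, collecting the unmatched old lines directly, instead of A's difflib round-trip that renders a unified diff to text and parses '+'-prefixed lines back out; Pre_ excludes old texts with a line starting with '++' (stripped length > 5), which A's text-level parse mistakes for a '+++' file header and drops, and old texts of >= 200 lines containing a line repeated more than length//100+1 times, where difflib's autojunk heuristic arbitrarily ignores matches on popular lines.
-- outside the precondition, e.g. on find_lost_content('++grabbed', ''): A returns [], B returns ['++grabbed']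
import Mathlib
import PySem

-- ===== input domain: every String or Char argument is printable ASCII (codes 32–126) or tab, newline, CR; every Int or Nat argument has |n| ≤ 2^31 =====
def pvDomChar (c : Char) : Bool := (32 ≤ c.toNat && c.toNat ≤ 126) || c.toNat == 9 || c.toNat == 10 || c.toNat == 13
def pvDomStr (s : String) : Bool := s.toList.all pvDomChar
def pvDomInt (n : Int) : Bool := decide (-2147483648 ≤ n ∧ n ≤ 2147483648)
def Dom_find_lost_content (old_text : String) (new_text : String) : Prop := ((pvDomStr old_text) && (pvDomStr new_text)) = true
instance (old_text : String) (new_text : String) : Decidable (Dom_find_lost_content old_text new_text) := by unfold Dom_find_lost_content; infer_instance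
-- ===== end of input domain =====

-- B replaces A's difflib round-trip (render a unified diff to text, parse the '+' lines back
-- out) by a self-contained diff: a DP longest-common-run matcher per window and a worklist of
-- window pairs that collects the unmatched old lines directly (objective: alternative).

-- ===== PORT A =====
-- Both Pythons invoke difflib.SequenceMatcher(None, new_lines, old_lines) (A through
-- unified_diff, B through get_opcodes); the helpers up to pvGetOpcodes are a step-for-step
-- port of that shared library machinery (difflib.__chain_b, find_longest_match,
-- get_matching_blocks, get_opcodes).

-- an opcode (tag, i1, i2, j1, j2)
abbrev PvOp := String × Nat × Nat × Nat × Nat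

-- Python string concatenation p + s
def pvCat (p s : String) : String := String.ofList (p.toList ++ s.toList)

-- s.split('\n')  (split? returns none only for sep = '', so getD never fires)
def pvSplitNL (s : String) : List String := (PySem.Str.split? s "\n").getD []

-- xs[i1:i2] (nonnegative bounds)
def pvSlice (xs : List String) (i1 i2 : Nat) : List String :=
  PySem.List.slice xs (some (i1 : Int)) (some (i2 : Int))

-- difflib.SequenceMatcher.__chain_b with isjunk=None: b2j (indices of each element of b),
-- then (autojunk) deletion of popular elements when len(b) >= 200; bjunk = set() stays empty.
def pvChainB (b : List String) : PySem.Dict String (List Nat) :=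
  let b2j := (b.foldl
    (fun (st : Nat × PySem.Dict String (List Nat)) elt =>
      (st.1 + 1, st.2.modify elt [] (fun l => l ++ [st.1])))
    (0, PySem.Dict.empty)).2
  let n := b.length
  let popular : PySem.Set String :=
    if 200 ≤ n then
      let ntest := n / 100 + 1
      b2j.items.foldl
        (fun (s : PySem.Set String) p => if ntest < p.2.length then PySem.Set.add s p.1 else s)
        PySem.Set.empty
    else PySem.Set.empty
  -- 'for elt in popular: del b2j[elt]' — the resulting dict does not depend on the set's order
  popular.foldl (fun d elt => d.erase elt) b2j

-- inner loop 'for j in b2j.get(a[i], nothing)' of find_longest_match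
-- (j2len is keyed by Int so that the lookup of j-1 at j=0 misses, as in Python)
def pvFlmInner (blo bhi : Nat) (j2len : PySem.Dict Int Nat) (i : Nat) :
    List Nat → PySem.Dict Int Nat → Nat × Nat × Nat → PySem.Dict Int Nat × (Nat × Nat × Nat)
  | [], newj2len, best => (newj2len, best)
  | j :: rest, newj2len, best =>
      if j < blo then pvFlmInner blo bhi j2len i rest newj2len best          -- continue
      else if bhi ≤ j then (newj2len, best)                                  -- break
      else
        let k := j2len.getD ((j : Int) - 1) 0 + 1
        let newj2len := newj2len.insert (j : Int) k
        let best := if best.2.2 < k then (i + 1 - k, j + 1 - k, k) else best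
        pvFlmInner blo bhi j2len i rest newj2len best

-- outer loop 'for i in range(alo, ahi)' of find_longest_match
def pvFlmScan (a : List String) (b2j : PySem.Dict String (List Nat)) (alo ahi blo bhi : Nat) :
    Nat × Nat × Nat :=
  ((List.range' alo (ahi - alo)).foldl
    (fun (st : PySem.Dict Int Nat × (Nat × Nat × Nat)) i =>
      pvFlmInner blo bhi st.1 i (b2j.getD (a.getD i "") []) PySem.Dict.empty st.2)
    (PySem.Dict.empty, (alo, blo, 0))).2

-- the 'while besti > alo and bestj > blo and isbjunk(b[bestj-1]) == junk and a[..] == b[..]'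
-- loops; structural recursion on besti (each pass needs alo < besti and decrements it)
def pvExtLo (a b : List String) (bjunk : List String) (alo blo : Nat) (junk : Bool) :
    Nat → Nat → Nat → Nat × Nat × Nat
  | 0, bestj, bestsize => (0, bestj, bestsize)        -- alo < 0 is false: loop exits
  | besti + 1, bestj, bestsize =>
      if alo < besti + 1 ∧ blo < bestj ∧ bjunk.contains (b.getD (bestj - 1) "") = junk ∧
          a.getD (besti + 1 - 1) "" = b.getD (bestj - 1) "" then
        pvExtLo a b bjunk alo blo junk besti (bestj - 1) (bestsize + 1)
      else (besti + 1, bestj, bestsize)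

-- the 'while besti+bestsize < ahi and ... : bestsize += 1' loops; the fuel argument is only a
-- totality guard: it starts at ahi ≥ ahi - (besti+bestsize) and stays an upper bound on the
-- remaining iterations, so the fuel-0 exit coincides with the loop guard turning false
def pvExtHi (a b : List String) (bjunk : List String) (ahi bhi : Nat) (junk : Bool)
    (besti bestj : Nat) : Nat → Nat → Nat
  | 0, bestsize => bestsize
  | fuel + 1, bestsize =>
      if besti + bestsize < ahi ∧ bestj + bestsize < bhi ∧
          bjunk.contains (b.getD (bestj + bestsize) "") = junk ∧
          a.getD (besti + bestsize) "" = b.getD (bestj + bestsize) "" then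
        pvExtHi a b bjunk ahi bhi junk besti bestj fuel (bestsize + 1)
      else bestsize

-- difflib.SequenceMatcher.find_longest_match (bjunk is empty here since isjunk=None)
def pvFindLongestMatch (a b : List String) (b2j : PySem.Dict String (List Nat))
    (bjunk : List String) (alo ahi blo bhi : Nat) : Nat × Nat × Nat :=
  let best := pvFlmScan a b2j alo ahi blo bhi
  let best := pvExtLo a b bjunk alo blo false best.1 best.2.1 best.2.2
  let bestsize := pvExtHi a b bjunk ahi bhi false best.1 best.2.1 ahi best.2.2
  let best := pvExtLo a b bjunk alo blo true best.1 best.2.1 bestsize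
  let bestsize := pvExtHi a b bjunk ahi bhi true best.1 best.2.1 ahi best.2.2
  (best.1, best.2.1, bestsize)

-- the 'while queue:' loop of get_matching_blocks; Python pops from the END of the queue,
-- so the queue is kept here head-first (cons = push, head = pop).  The fuel argument is only a
-- totality guard (the loop runs at most 2*len(a)+1 times, since each match found consumes a
-- nonempty disjoint a-range); at the call site the fuel is large enough that it never runs out.
def pvMbLoop (a b : List String) (b2j : PySem.Dict String (List Nat)) (bjunk : List String) :
    Nat → List (Nat × Nat × Nat × Nat) → List (Nat × Nat × Nat) → List (Nat × Nat × Nat)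
  | _, [], acc => acc
  | 0, _, acc => acc                       -- never reached with the call site's fuel
  | fuel + 1, (alo, ahi, blo, bhi) :: rest, acc =>
      let x := pvFindLongestMatch a b b2j bjunk alo ahi blo bhi
      let i := x.1; let j := x.2.1; let k := x.2.2
      if k ≠ 0 then
        let acc := acc ++ [(i, j, k)]
        -- Python appends region1 then region2 and pops the last: region2 is processed first
        let rest := if alo < i ∧ blo < j then (alo, i, blo, j) :: rest else rest
        let rest := if i + k < ahi ∧ j + k < bhi then (i + k, ahi, j + k, bhi) :: rest else rest
        pvMbLoop a b b2j bjunk fuel rest acc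
      else pvMbLoop a b b2j bjunk fuel rest acc

-- difflib.SequenceMatcher.get_matching_blocks: queue loop, sort, collapse adjacent blocks
def pvGetMatchingBlocks (a b : List String) (b2j : PySem.Dict String (List Nat))
    (bjunk : List String) : List (Nat × Nat × Nat) :=
  let mb := pvMbLoop a b b2j bjunk (2 * (a.length + b.length) + 1) [(0, a.length, 0, b.length)] []
  -- matching_blocks.sort(): tuple order; first two components determine it (the i-ranges are disjoint)
  let mb := PySem.List.sorted2 mb (fun t => t.1) (fun t => t.2.1) false
  let st := mb.foldl
    (fun (st : (Nat × Nat × Nat) × List (Nat × Nat × Nat)) blk =>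
      let i1 := st.1.1; let j1 := st.1.2.1; let k1 := st.1.2.2
      let i2 := blk.1; let j2 := blk.2.1; let k2 := blk.2.2
      if i1 + k1 = i2 ∧ j1 + k1 = j2 then ((i1, j1, k1 + k2), st.2)
      else ((i2, j2, k2), if k1 ≠ 0 then st.2 ++ [(i1, j1, k1)] else st.2))
    ((0, 0, 0), [])
  let nonAdj := if st.1.2.2 ≠ 0 then st.2 ++ [st.1] else st.2
  nonAdj ++ [(a.length, b.length, 0)]

-- difflib.SequenceMatcher.get_opcodes (the library call shared by both ports)
def pvGetOpcodes (a b : List String) : List PvOp :=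
  let b2j := pvChainB b
  let bjunk : List String := []          -- isjunk is None: self.bjunk = set()
  ((pvGetMatchingBlocks a b b2j bjunk).foldl
    (fun (st : Nat × Nat × List PvOp) blk =>
      let ai := blk.1; let bj := blk.2.1; let size := blk.2.2
      let i := st.1; let j := st.2.1; let answer := st.2.2
      let tag : String :=
        if i < ai ∧ j < bj then "replace"
        else if i < ai then "delete"
        else if j < bj then "insert"
        else ""
      let answer := if tag ≠ "" then answer ++ [(tag, i, ai, j, bj)] else answer
      let i := ai + size; let j := bj + size
      let answer := if size ≠ 0 then answer ++ [("equal", ai, i, bj, j)] else answer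
      (i, j, answer))
    (0, 0, [])).2.2

-- get_grouped_opcodes: fix-up of a leading/trailing 'equal' opcode
def pvAdjustFirstEq (n : Nat) : List PvOp → List PvOp
  | [] => []
  | (tag, i1, i2, j1, j2) :: rest =>
      if tag = "equal" then (tag, max i1 (i2 - n), i2, max j1 (j2 - n), j2) :: rest
      else (tag, i1, i2, j1, j2) :: rest

def pvAdjustLastEq (n : Nat) : List PvOp → List PvOp
  | [] => []
  | [(tag, i1, i2, j1, j2)] =>
      if tag = "equal" then [(tag, i1, min i2 (i1 + n), j1, min j2 (j1 + n))]
      else [(tag, i1, i2, j1, j2)]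
  | x :: y :: rest => x :: pvAdjustLastEq n (y :: rest)

-- the grouping loop of get_grouped_opcodes (first argument = the pending 'group' list)
def pvGroupSplit (n : Nat) : List PvOp → List PvOp → List (List PvOp)
  | group, [] =>
      if group ≠ [] ∧ ¬(group.length = 1 ∧ (group.headD ("", 0, 0, 0, 0)).1 = "equal")
      then [group] else []
  | group, (tag, i1, i2, j1, j2) :: rest =>
      if tag = "equal" ∧ n + n < i2 - i1 then
        (group ++ [(tag, i1, min i2 (i1 + n), j1, min j2 (j1 + n))]) ::
          pvGroupSplit n [(tag, max i1 (i2 - n), i2, max j1 (j2 - n), j2)] rest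
      else pvGroupSplit n (group ++ [(tag, i1, i2, j1, j2)]) rest

def pvGroupedOpcodes (n : Nat) (codes : List PvOp) : List (List PvOp) :=
  let codes := if codes = [] then [("equal", 0, 1, 0, 1)] else codes
  let codes := pvAdjustFirstEq n codes
  let codes := pvAdjustLastEq n codes
  pvGroupSplit n [] codes

-- difflib._format_range_unified
def pvFormatRangeUnified (start stop : Nat) : String :=
  let beginning := start + 1
  let length := stop - start
  if length = 1 then PySem.Int.toStr (beginning : Int)
  else
    let beginning := if length = 0 then beginning - 1 else beginning
    String.ofList ((PySem.Int.toStr (beginning : Int)).toList ++ ",".toList ++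
               (PySem.Int.toStr (length : Int)).toList)

-- the generator body of difflib.unified_diff(a, b, n=0) (fromfile = tofile = dates = '',
-- lineterm = '\n'), collected into a list of the yielded strings
def pvUnifiedDiff (a b : List String) (groups : List (List PvOp)) : List String :=
  (groups.foldl
    (fun (st : Bool × List String) g =>
      let lines := if st.1 = false then st.2 ++ ["--- \n", "+++ \n"] else st.2
      let first := g.headD ("", 0, 0, 0, 0)
      let last := g.getLastD ("", 0, 0, 0, 0)
      let file1 := pvFormatRangeUnified first.2.1 last.2.2.1
      let file2 := pvFormatRangeUnified first.2.2.2.1 last.2.2.2.2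
      let lines := lines ++
        [String.ofList ("@@ -".toList ++ file1.toList ++ " +".toList ++ file2.toList ++ " @@\n".toList)]
      let lines := g.foldl
        (fun acc op =>
          let tag := op.1; let i1 := op.2.1; let i2 := op.2.2.1
          let j1 := op.2.2.2.1; let j2 := op.2.2.2.2
          if tag = "equal" then acc ++ (pvSlice a i1 i2).map (pvCat " ")
          else
            let acc := if tag = "replace" ∨ tag = "delete"
                       then acc ++ (pvSlice a i1 i2).map (pvCat "-") else acc
            if tag = "replace" ∨ tag = "insert"
            then acc ++ (pvSlice b j1 j2).map (pvCat "+") else acc)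
        lines
      (true, lines))
    (false, [])).2

def find_lost_content (old_text : String) (new_text : String) : List String :=
  let old_lines := pvSplitNL old_text
  let new_lines := pvSplitNL new_text
  let diff := pvUnifiedDiff new_lines old_lines
    (pvGroupedOpcodes 0 (pvGetOpcodes new_lines old_lines))
  diff.foldl
    (fun acc line =>
      if PySem.Str.startswith line "+" = true ∧ ¬ PySem.Str.startswith line "+++" = true then
        let content := PySem.Str.strip (PySem.Str.slice line (some 1) none)
        if content ≠ "" ∧ 5 < PySem.Str.len content then acc ++ [content] else acc
      else acc)
    []

-- ===== PORT B =====
-- B computes the diff itself: a DP longest-common-run matcher per window and a worklist of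
-- (new,old) window pairs, collecting the unmatched old lines directly.

-- longest_common_run(nlo, nhi, olo, ohi) of Source B (row-DP over the two windows)
def pvLcr (nl ol : List String) (nlo nhi olo ohi : Nat) : Nat × Nat × Nat :=
  ((List.range' nlo (nhi - nlo)).foldl
    (fun (st : (Nat × Nat × Nat) × List Nat) i =>
      (List.range' olo (ohi - olo)).foldl
        (fun (st2 : (Nat × Nat × Nat) × List Nat) j =>
          if nl.getD i "" = ol.getD j "" then
            let run := (if olo < j then st.2.getD (j - olo - 1) 0 else 0) + 1
            let best := if st2.1.2.2 < run then (i + 1 - run, j + 1 - run, run) else st2.1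
            (best, st2.2.set (j - olo) run)
          else st2)
        (st.1, List.replicate (ohi - olo) 0))
    ((nlo, olo, 0), List.replicate (ohi - olo) 0)).1

-- the 'while windows:' worklist loop of Source B (pop = head; left window pushed last, popped first;
-- the fuel argument is only a totality guard, ample at the call site)
def pvCollect (nl ol : List String) :
    Nat → List (Nat × Nat × Nat × Nat) → List String → List String
  | _, [], acc => acc
  | 0, _, acc => acc
  | fuel + 1, (nlo, nhi, olo, ohi) :: rest, acc =>
      let x := pvLcr nl ol nlo nhi olo ohi
      let ni := x.1; let oj := x.2.1; let k := x.2.2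
      if k = 0 then
        let acc := (pvSlice ol olo ohi).foldl
          (fun acc2 line =>
            let content := PySem.Str.strip line
            if content ≠ "" ∧ 5 < PySem.Str.len content then acc2 ++ [content] else acc2)
          acc
        pvCollect nl ol fuel rest acc
      else
        pvCollect nl ol fuel ((nlo, ni, olo, oj) :: (ni + k, nhi, oj + k, ohi) :: rest) acc

def find_lost_content_alt (old_text : String) (new_text : String) : List String :=
  let old_lines := pvSplitNL old_text
  let new_lines := pvSplitNL new_text
  pvCollect new_lines old_lines (new_lines.length + old_lines.length + 1)
    [(0, new_lines.length, 0, old_lines.length)] []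

-- ===== PRECONDITION & SPEC =====
-- Pre_ excludes (a) old texts with a line starting with '++' whose stripped length exceeds 5:
-- A's text-level parse mistakes the '+'-prefixed diff line of such a lost line for a '+++' file
-- header and silently drops it; and (b) old texts of at least 200 lines containing a line
-- repeated more than length/100+1 times, where difflib's autojunk heuristic arbitrarily ignores
-- matches on the popular lines.  Both are artefacts of A's difflib round-trip that B's direct
-- diff does not reproduce; A still returns a value on those inputs (see the cited examples).
def Pre_find_lost_content (old_text : String) (new_text : String) : Prop :=
  (∀ l ∈ pvSplitNL old_text,
    ¬(PySem.Str.startswith l "++" = true ∧ 5 < PySem.Str.len (PySem.Str.strip l))) ∧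
  ((pvSplitNL old_text).length < 200 ∨
    ∀ l ∈ pvSplitNL old_text,
      (pvSplitNL old_text).count l ≤ (pvSplitNL old_text).length / 100 + 1)
instance (old_text : String) (new_text : String) : Decidable (Pre_find_lost_content old_text new_text) := by
  unfold Pre_find_lost_content; infer_instance

def pvWitness_find_lost_content : String × String := ("hello world\nfoo barbar", "hello world")

def Spec_find_lost_content (old_text : String) (new_text : String) (out : List String) : Prop :=
  out = find_lost_content_alt old_text new_text
instance (old_text : String) (new_text : String) (out : List String) : Decidable (Spec_find_lost_content old_text new_text out) := by
  unfold Spec_find_lost_content; infer_instance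

-- ===== CLAIM (what is proved, stated in full; the proofs are below) =====
def Claim_equal_find_lost_content : Prop := ∀ (old_text : String) (new_text : String), Dom_find_lost_content old_text new_text → Pre_find_lost_content old_text new_text → Spec_find_lost_content old_text new_text (find_lost_content old_text new_text)
-- ===== LEMMAS AND PROOFS =====

-- B's per-line filter: [strip line] when nonempty and longer than 5 characters
def pvGB (line : String) : List String :=
  let c := PySem.Str.strip line
  if c ≠ "" ∧ 5 < PySem.Str.len c then [c] else []

-- A's per-diff-line filter
def pvGA (line : String) : List String :=
  if PySem.Str.startswith line "+" = true ∧ ¬ PySem.Str.startswith line "+++" = true then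
    let c := PySem.Str.strip (PySem.Str.slice line (some 1) none)
    if c ≠ "" ∧ 5 < PySem.Str.len c then [c] else []
  else []

-- A's filter seen on the underlying old line of a '+' diff line
def pvGA' (line : String) : List String :=
  if PySem.Str.startswith line "++" = true then [] else pvGB line

-- contribution of one opcode to A's / B's result
def pvContribA (b : List String) (op : PvOp) : List String :=
  if op.1 = "replace" ∨ op.1 = "insert" then (pvSlice b op.2.2.2.1 op.2.2.2.2).flatMap pvGA'
  else []
def pvContribB (b : List String) (op : PvOp) : List String :=
  if op.1 = "insert" ∨ op.1 = "replace" then (pvSlice b op.2.2.2.1 op.2.2.2.2).flatMap pvGB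
  else []

theorem pv_foldl_eq_flatMap {α β : Type} (f : List β → α → List β) (g : α → List β)
    (h : ∀ acc x, f acc x = acc ++ g x) :
    ∀ (xs : List α) (acc : List β), xs.foldl f acc = acc ++ xs.flatMap g := by
  intro xs
  induction xs with
  | nil => simp
  | cons x xs ih => intro acc; simp [h, ih]

theorem pv_flatMap_congr {α β : Type} {f g : α → List β} :
    ∀ {xs : List α}, (∀ x ∈ xs, f x = g x) → xs.flatMap f = xs.flatMap g := by
  intro xs
  induction xs with
  | nil => simp
  | cons x xs ih => intro h; simp [h x (by simp), ih (fun y hy => h y (by simp [hy]))]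

theorem pvGA_of_not_plus (line : String) (h : PySem.Str.startswith line "+" = false) :
    pvGA line = [] := by
  unfold pvGA
  rw [if_neg]
  intro ⟨h1, _⟩
  rw [h] at h1
  exact Bool.false_ne_true h1

theorem pvGA_space (l : String) : pvGA (pvCat " " l) = [] := by
  apply pvGA_of_not_plus
  simp [pvCat, PySem.Str.startswith, String.toList_ofList, PySem.Chars.startswith,
    List.isPrefixOf, show " ".toList = [' '] from rfl, show "+".toList = ['+'] from rfl]

theorem pvGA_minus (l : String) : pvGA (pvCat "-" l) = [] := by
  apply pvGA_of_not_plus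
  simp [pvCat, PySem.Str.startswith, String.toList_ofList, PySem.Chars.startswith,
    List.isPrefixOf, show "-".toList = ['-'] from rfl, show "+".toList = ['+'] from rfl]

theorem pvGA_at (cs : List Char) : pvGA (String.ofList ('@' :: cs)) = [] := by
  apply pvGA_of_not_plus
  simp [PySem.Str.startswith, String.toList_ofList, PySem.Chars.startswith,
    List.isPrefixOf, show "+".toList = ['+'] from rfl]

theorem pv_slice_one_cat (l : String) : PySem.Str.slice (pvCat "+" l) (some 1) none = l := by
  apply String.toList_injective
  rw [PySem.Str.toList_slice, pvCat, String.toList_ofList]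
  have := PySem.List.slice_from (xs := "+".toList ++ l.toList) (a := 1) (by norm_num)
  simpa [PySem.Chars.slice, show "+".toList = ['+'] from rfl] using this

theorem pvGA_plus (l : String) : pvGA (pvCat "+" l) = pvGA' l := by
  have h1 : PySem.Str.startswith (pvCat "+" l) "+" = true := by
    simp [pvCat, PySem.Str.startswith, String.toList_ofList, PySem.Chars.startswith,
      List.isPrefixOf, show "+".toList = ['+'] from rfl]
  have h3 : PySem.Str.startswith (pvCat "+" l) "+++" = PySem.Str.startswith l "++" := by
    simp [pvCat, PySem.Str.startswith, String.toList_ofList, PySem.Chars.startswith,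
      List.isPrefixOf, show "+".toList = ['+'] from rfl,
      show "+++".toList = ['+', '+', '+'] from rfl, show "++".toList = ['+', '+'] from rfl]
  unfold pvGA pvGA'
  rw [h1, h3, pv_slice_one_cat]
  by_cases h : PySem.Str.startswith l "++" = true
  · rw [h]; simp
  · simp only [Bool.not_eq_true] at h
    rw [h]; simp [pvGB]

theorem pv_flatMap_map_nil {f : String → String} (hf : ∀ l, pvGA (f l) = [])
    (xs : List String) : (xs.map f).flatMap pvGA = [] := by
  rw [List.flatMap_map]; simp [Function.comp, hf]

theorem pv_flatMap_map_plus (xs : List String) :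
    (xs.map (pvCat "+")).flatMap pvGA = xs.flatMap pvGA' := by
  rw [List.flatMap_map]; exact pv_flatMap_congr (fun x _ => pvGA_plus x)

-- contribA of an 'equal' opcode is empty
theorem pvContribA_equal (b : List String) (op : PvOp) (h : op.1 = "equal") :
    pvContribA b op = [] := by
  simp only [pvContribA, h]
  rw [if_neg (by decide)]

-- the inner rendering fold of pvUnifiedDiff, filtered, is the opcode contributions
theorem pv_render_fold (a b : List String) :
    ∀ (g : List PvOp) (lines : List String),
      (g.foldl
        (fun acc op =>
          let tag := op.1; let i1 := op.2.1; let i2 := op.2.2.1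
          let j1 := op.2.2.2.1; let j2 := op.2.2.2.2
          if tag = "equal" then acc ++ (pvSlice a i1 i2).map (pvCat " ")
          else
            let acc := if tag = "replace" ∨ tag = "delete"
                       then acc ++ (pvSlice a i1 i2).map (pvCat "-") else acc
            if tag = "replace" ∨ tag = "insert"
            then acc ++ (pvSlice b j1 j2).map (pvCat "+") else acc)
        lines).flatMap pvGA
      = lines.flatMap pvGA ++ g.flatMap (pvContribA b) := by
  intro g
  induction g with
  | nil => simp
  | cons op ops ih =>
      intro lines
      simp only [List.foldl_cons, List.flatMap_cons, ih]
      by_cases he : op.1 = "equal"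
      · simp [he, pvContribA_equal b op he, pv_flatMap_map_nil pvGA_space]
      · simp only [he, if_false, if_neg he]
        by_cases hpi : op.1 = "replace" ∨ op.1 = "insert"
        · by_cases hpd : op.1 = "replace" ∨ op.1 = "delete" <;>
            simp [hpi, hpd, pvContribA, pv_flatMap_map_nil pvGA_minus,
              pv_flatMap_map_plus, List.append_assoc]
        · by_cases hpd : op.1 = "replace" ∨ op.1 = "delete" <;>
            simp [hpi, hpd, pvContribA, pv_flatMap_map_nil pvGA_minus, List.append_assoc]

-- the filtered unified-diff text is exactly the per-opcode contributions, group by group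
theorem pv_unified_fold (a b : List String) :
    ∀ (groups : List (List PvOp)) (st : Bool × List String),
      ((groups.foldl
        (fun (st : Bool × List String) g =>
          let lines := if st.1 = false then st.2 ++ ["--- \n", "+++ \n"] else st.2
          let first := g.headD ("", 0, 0, 0, 0)
          let last := g.getLastD ("", 0, 0, 0, 0)
          let file1 := pvFormatRangeUnified first.2.1 last.2.2.1
          let file2 := pvFormatRangeUnified first.2.2.2.1 last.2.2.2.2
          let lines := lines ++
            [String.ofList ("@@ -".toList ++ file1.toList ++ " +".toList ++ file2.toList ++ " @@\n".toList)]
          let lines := g.foldl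
            (fun acc op =>
              let tag := op.1; let i1 := op.2.1; let i2 := op.2.2.1
              let j1 := op.2.2.2.1; let j2 := op.2.2.2.2
              if tag = "equal" then acc ++ (pvSlice a i1 i2).map (pvCat " ")
              else
                let acc := if tag = "replace" ∨ tag = "delete"
                           then acc ++ (pvSlice a i1 i2).map (pvCat "-") else acc
                if tag = "replace" ∨ tag = "insert"
                then acc ++ (pvSlice b j1 j2).map (pvCat "+") else acc)
            lines
          (true, lines))
        st).2).flatMap pvGA
      = st.2.flatMap pvGA ++ groups.flatMap (fun g => g.flatMap (pvContribA b)) := by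
  intro groups
  induction groups with
  | nil => simp
  | cons g gs ih =>
      intro st
      simp only [List.foldl_cons, List.flatMap_cons, ih]
      rw [pv_render_fold a b]
      by_cases hs : st.1 = false <;>
        simp [hs, List.flatMap_append, pvGA_at, List.append_assoc,
          show pvGA "--- \n" = [] from by decide, show pvGA "+++ \n" = [] from by decide]

theorem pv_unifiedDiff_flatMap (a b : List String) (groups : List (List PvOp)) :
    (pvUnifiedDiff a b groups).flatMap pvGA = groups.flatMap (fun g => g.flatMap (pvContribA b)) := by
  have := pv_unified_fold a b groups (false, [])
  simpa [pvUnifiedDiff] using this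

-- the grouping loop only splits/clamps 'equal' opcodes: filtered contributions are unchanged
theorem pv_groupSplit_flatMap (b : List String) :
    ∀ (codes : List PvOp) (group : List PvOp),
      (pvGroupSplit 0 group codes).flatMap (fun g => g.flatMap (pvContribA b))
      = group.flatMap (pvContribA b) ++ codes.flatMap (pvContribA b) := by
  intro codes
  induction codes with
  | nil =>
      intro group
      simp only [pvGroupSplit]
      split_ifs with h
      · simp
      · push_neg at h
        by_cases hg : group = []
        · simp [hg]
        · obtain ⟨h1, h2⟩ := h hg
          obtain ⟨x, hx⟩ := List.length_eq_one_iff.mp h1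
          rw [hx]
          rw [hx] at h2
          simp only [List.headD_cons] at h2
          simp [pvContribA_equal b x h2]
  | cons op rest ih =>
      intro group
      obtain ⟨tag, i1, i2, j1, j2⟩ := op
      simp only [pvGroupSplit]
      split_ifs with h
      · have hce : ∀ r : Nat × Nat × Nat × Nat, pvContribA b (tag, r) = [] :=
          fun r => pvContribA_equal b (tag, r) h.1
        rw [List.flatMap_cons, ih]
        simp [List.flatMap_append, hce, List.append_assoc]
      · rw [ih]
        simp [List.flatMap_append, List.append_assoc]

theorem pv_adjustFirst_flatMap (b : List String) (n : Nat) (codes : List PvOp) :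
    (pvAdjustFirstEq n codes).flatMap (pvContribA b) = codes.flatMap (pvContribA b) := by
  cases codes with
  | nil => rfl
  | cons op rest =>
      obtain ⟨tag, i1, i2, j1, j2⟩ := op
      simp only [pvAdjustFirstEq]
      split_ifs with h
      · have hce : ∀ r : Nat × Nat × Nat × Nat, pvContribA b (tag, r) = [] :=
          fun r => pvContribA_equal b (tag, r) h
        simp [hce]
      · rfl

theorem pv_adjustLast_flatMap (b : List String) (n : Nat) :
    ∀ (codes : List PvOp),
      (pvAdjustLastEq n codes).flatMap (pvContribA b) = codes.flatMap (pvContribA b) := by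
  intro codes
  induction codes with
  | nil => rfl
  | cons op rest ih =>
      cases rest with
      | nil =>
          obtain ⟨tag, i1, i2, j1, j2⟩ := op
          simp only [pvAdjustLastEq]
          split_ifs with h
          · have hce : ∀ r : Nat × Nat × Nat × Nat, pvContribA b (tag, r) = [] :=
              fun r => pvContribA_equal b (tag, r) h
            simp [hce]
          · rfl
      | cons y ys =>
          obtain ⟨t0, r1, r2, r3, r4⟩ := op
          simp only [pvAdjustLastEq, List.flatMap_cons]
          rw [ih]
          simp

-- A's result, as the per-opcode contributions over the raw opcode list
theorem pv_A_eq_contrib (old_lines new_lines : List String) :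
    (pvUnifiedDiff new_lines old_lines
        (pvGroupedOpcodes 0 (pvGetOpcodes new_lines old_lines))).flatMap pvGA
    = (pvGetOpcodes new_lines old_lines).flatMap (pvContribA old_lines) := by
  rw [pv_unifiedDiff_flatMap]
  unfold pvGroupedOpcodes
  rw [pv_groupSplit_flatMap]
  simp only [List.flatMap_nil, List.nil_append]
  rw [pv_adjustLast_flatMap, pv_adjustFirst_flatMap]
  split_ifs with h
  · simp [h, pvContribA_equal old_lines ("equal", 0, 1, 0, 1) rfl]
  · rfl

-- find_lost_content is the filter fold over the diff text
theorem pv_A_filter (old_text new_text : String) :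
    find_lost_content old_text new_text
    = (pvGetOpcodes (pvSplitNL new_text) (pvSplitNL old_text)).flatMap
        (pvContribA (pvSplitNL old_text)) := by
  rw [← pv_A_eq_contrib]
  unfold find_lost_content
  rw [pv_foldl_eq_flatMap _ pvGA]
  · simp
  · intro acc x
    simp only [pvGA]
    split_ifs <;> simp

-- outside the excluded inputs, the two per-line filters agree on every line of old_lines
theorem pv_contrib_eq (old_lines : List String)
    (h : ∀ l ∈ old_lines,
      ¬(PySem.Str.startswith l "++" = true ∧ 5 < PySem.Str.len (PySem.Str.strip l)))
    (op : PvOp) : pvContribA old_lines op = pvContribB old_lines op := by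
  simp only [pvContribA, pvContribB, or_comm]
  split_ifs with hc
  · apply pv_flatMap_congr
    intro l hl
    have hmem := PySem.List.mem_of_mem_slice _ _ _ hl
    have hnl := h l hmem
    by_cases hpp : PySem.Str.startswith l "++" = true
    · have hlen : ¬ 5 < PySem.Str.len (PySem.Str.strip l) := fun hlt => hnl ⟨hpp, hlt⟩
      have hga : pvGA' l = [] := by unfold pvGA'; rw [if_pos hpp]
      have hgb : pvGB l = [] := by
        unfold pvGB
        rw [if_neg]
        intro ⟨_, h5⟩
        exact hlen h5
      rw [hga, hgb]
    · unfold pvGA'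
      rw [if_neg hpp]
  · rfl


-- ===== proof-side definitions: the common matching specification =====

-- length of the common run of equal lines ending at a[i], b[j], confined to i ≥ alo, j ≥ blo
def pvRun (a b : List String) (alo blo : Nat) : Nat → Nat → Nat
  | 0, j => if a.getD 0 "" = b.getD j "" then 1 else 0
  | i + 1, j =>
      if a.getD (i + 1) "" = b.getD j "" then
        (if alo < i + 1 ∧ blo < j then pvRun a b alo blo i (j - 1) else 0) + 1
      else 0

-- one candidate update of the running best (besti, bestj, bestsize)
def pvUpd (a b : List String) (alo blo : Nat) (best : Nat × Nat × Nat) (i j : Nat) :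
    Nat × Nat × Nat :=
  let r := pvRun a b alo blo i j
  if best.2.2 < r then (i + 1 - r, j + 1 - r, r) else best

def pvInnerSpec (a b : List String) (alo blo bhi : Nat) (i : Nat) (best : Nat × Nat × Nat) :
    Nat × Nat × Nat :=
  (List.range' blo (bhi - blo)).foldl (fun best j => pvUpd a b alo blo best i j) best

-- the first maximal common run of the window: what both matchers compute
def pvSpecBest (a b : List String) (alo ahi blo bhi : Nat) : Nat × Nat × Nat :=
  (List.range' alo (ahi - alo)).foldl (fun best i => pvInnerSpec a b alo blo bhi i best)
    (alo, blo, 0)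

abbrev PvReg := Nat × Nat × Nat × Nat

def pvMeas (r : PvReg) : Nat := (r.2.1 - r.1) + (r.2.2.2 - r.2.2.1)
def pvStackW (stack : List PvReg) : Nat := (stack.map (fun r => pvMeas r + 1)).sum
def pvValid (a b : List String) (r : PvReg) : Prop :=
  r.1 ≤ r.2.1 ∧ r.2.2.1 ≤ r.2.2.2 ∧ r.2.2.2 ≤ b.length

-- the matching blocks of a window, in order of position (fuel-indexed; ample fuel is stable)
def pvInorder (a b : List String) : Nat → PvReg → List (Nat × Nat × Nat)
  | 0, _ => []
  | fuel + 1, r =>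
      let x := pvSpecBest a b r.1 r.2.1 r.2.2.1 r.2.2.2
      if x.2.2 = 0 then []
      else
        pvInorder a b fuel (r.1, x.1, r.2.2.1, x.2.1) ++
          x :: pvInorder a b fuel (x.1 + x.2.2, r.2.1, x.2.1 + x.2.2, r.2.2.2)

-- the filtered old lines living in the gaps between consecutive blocks
def pvGl (b : List String) : Nat → List (Nat × Nat × Nat) → List String
  | _, [] => []
  | pos, (_, j, k) :: rest => (pvSlice b pos j).flatMap pvGB ++ pvGl b (j + k) rest

-- b2j before the autojunk step (the value pvChainB computes under Pre_'s second conjunct)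
def pvRawB2j (b : List String) : PySem.Dict String (List Nat) :=
  (b.foldl
    (fun (st : Nat × PySem.Dict String (List Nat)) elt =>
      (st.1 + 1, st.2.modify elt [] (fun l => l ++ [st.1])))
    (0, PySem.Dict.empty)).2

-- the ascending list of positions of elt in b
def pvIdxs (b : List String) (elt : String) : List Nat :=
  (List.range' 0 b.length).filter (fun j => decide (b.getD j "" = elt))
-- ===== pvRun basics =====

theorem pvRun_eq (a b : List String) (alo blo i j : Nat) :
    pvRun a b alo blo i j =
      if a.getD i "" = b.getD j "" then
        (if alo < i ∧ blo < j then pvRun a b alo blo (i - 1) (j - 1) else 0) + 1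
      else 0 := by
  cases i with
  | zero => simp [pvRun]
  | succ n => rfl

theorem pvRun_le (a b : List String) (alo blo : Nat) :
    ∀ i j, pvRun a b alo blo i j ≤ i - alo + 1 ∧ pvRun a b alo blo i j ≤ j - blo + 1 := by
  intro i
  induction i with
  | zero => intro j; constructor <;> (simp [pvRun]; split <;> omega)
  | succ n ih =>
      intro j
      rw [pvRun]
      split
      · split
        · have := ih (j - 1); omega
        · omega
      · omega

theorem pvRun_chain (a b : List String) (alo blo : Nat) :
    ∀ i j t, t < pvRun a b alo blo i j → a.getD (i - t) "" = b.getD (j - t) "" := by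
  intro i
  induction i with
  | zero =>
      intro j t ht
      simp only [pvRun] at ht
      split at ht
      · rename_i hm
        have : t = 0 := by omega
        subst this
        simpa using hm
      · omega
  | succ n ih =>
      intro j t ht
      rw [pvRun_eq] at ht
      simp only [Nat.add_sub_cancel] at ht
      split at ht
      · rename_i hm
        cases t with
        | zero => simpa using hm
        | succ s =>
            split at ht
            · have := ih (j - 1) s (by omega)
              simpa [show n + 1 - (s + 1) = n - s by omega,
                show j - 1 - s = j - (s + 1) by omega] using this
            · omega
      · omega

theorem pvRun_ge (a b : List String) (alo blo : Nat) :
    ∀ m i j, (∀ t, t ≤ m → a.getD (i - t) "" = b.getD (j - t) "") →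
      m ≤ i - alo → m ≤ j - blo → m + 1 ≤ pvRun a b alo blo i j := by
  intro m
  induction m with
  | zero =>
      intro i j hch _ _
      rw [pvRun_eq, if_pos (by simpa using hch 0 (le_refl 0))]
      omega
  | succ s ih =>
      intro i j hch hi hj
      rw [pvRun_eq, if_pos (by simpa using hch 0 (by omega))]
      have hcond : alo < i ∧ blo < j := by omega
      rw [if_pos hcond]
      have := ih (i - 1) (j - 1)
        (fun t ht => by
          have := hch (t + 1) (by omega)
          simpa [show i - 1 - t = i - (t+1) by omega, show j - 1 - t = j - (t+1) by omega] using this)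
        (by omega) (by omega)
      omega

-- ===== properties of the spec fold =====

def pvBestP (a b : List String) (alo ahi blo bhi : Nat) (best : Nat × Nat × Nat) : Prop :=
  best = (alo, blo, 0) ∨
    (∃ i j, alo ≤ i ∧ i < ahi ∧ blo ≤ j ∧ j < bhi ∧
      pvRun a b alo blo i j = best.2.2 ∧ 1 ≤ best.2.2 ∧
      best.1 = i + 1 - best.2.2 ∧ best.2.1 = j + 1 - best.2.2)

theorem pv_foldl_inv {α β : Type} (P : β → Prop) (f : β → α → β) :
    ∀ (l : List α), (∀ x ∈ l, ∀ s, P s → P (f s x)) → ∀ s, P s → P (l.foldl f s) := by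
  intro l
  induction l with
  | nil => intro _ s hs; exact hs
  | cons x t ih =>
      intro h s hs
      exact ih (fun y hy => h y (by simp [hy])) (f s x) (h x (by simp) s hs)

theorem pvUpd_P (a b : List String) (alo ahi blo bhi : Nat) (i j : Nat)
    (hi1 : alo ≤ i) (hi2 : i < ahi) (hj1 : blo ≤ j) (hj2 : j < bhi)
    (best : Nat × Nat × Nat) (h : pvBestP a b alo ahi blo bhi best) :
    pvBestP a b alo ahi blo bhi (pvUpd a b alo blo best i j) := by
  simp only [pvUpd]
  split
  · rename_i hlt
    right
    refine ⟨i, j, hi1, hi2, hj1, hj2, rfl, ?_, rfl, rfl⟩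
    show 1 ≤ pvRun a b alo blo i j
    omega
  · exact h

theorem pvSpecBest_P (a b : List String) (alo ahi blo bhi : Nat) :
    pvBestP a b alo ahi blo bhi (pvSpecBest a b alo ahi blo bhi) := by
  unfold pvSpecBest
  apply pv_foldl_inv (pvBestP a b alo ahi blo bhi)
  · intro i hi s hs
    unfold pvInnerSpec
    apply pv_foldl_inv (pvBestP a b alo ahi blo bhi)
    · intro j hj s' hs'
      rw [List.mem_range'_1] at hi hj
      exact pvUpd_P a b alo ahi blo bhi i j (by omega) (by omega) (by omega) (by omega) s' hs'
    · exact hs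
  · exact Or.inl rfl

theorem pvUpd_k_mono (a b : List String) (alo blo : Nat) (best : Nat × Nat × Nat) (i j : Nat) :
    best.2.2 ≤ (pvUpd a b alo blo best i j).2.2 := by
  simp only [pvUpd]
  split
  · rename_i h; exact le_of_lt h
  · exact le_refl _

theorem pvFoldUpd_k_mono (a b : List String) (alo blo : Nat) (i : Nat) :
    ∀ (l : List Nat) (best : Nat × Nat × Nat),
      best.2.2 ≤ ((l.foldl (fun best j => pvUpd a b alo blo best i j) best)).2.2 := by
  intro l
  induction l with
  | nil => intro best; exact le_refl _
  | cons j t ih =>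
      intro best
      exact le_trans (pvUpd_k_mono a b alo blo best i j) (ih _)

theorem pvInner_k_mono (a b : List String) (alo blo bhi : Nat) :
    ∀ (L : List Nat) (best : Nat × Nat × Nat),
      best.2.2 ≤ ((L.foldl (fun best i => pvInnerSpec a b alo blo bhi i best) best)).2.2 := by
  intro L
  induction L with
  | nil => intro best; exact le_refl _
  | cons i t ih =>
      intro best
      exact le_trans (pvFoldUpd_k_mono a b alo blo i _ best) (ih _)

theorem pvFoldUpd_ge (a b : List String) (alo blo : Nat) (i : Nat) :
    ∀ (l : List Nat) (best : Nat × Nat × Nat) (j : Nat), j ∈ l →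
      pvRun a b alo blo i j ≤ ((l.foldl (fun best j => pvUpd a b alo blo best i j) best)).2.2 := by
  intro l
  induction l with
  | nil => intro _ j hj; simp at hj
  | cons j0 t ih =>
      intro best j hj
      rcases List.mem_cons.mp hj with h | h
      · subst h
        refine le_trans ?_ (pvFoldUpd_k_mono a b alo blo i t _)
        simp only [pvUpd]
        split
        · exact le_refl _
        · omega
      · exact ih _ j h

theorem pvSpecBest_max (a b : List String) (alo ahi blo bhi : Nat) :
    ∀ i j, alo ≤ i → i < ahi → blo ≤ j → j < bhi →
      pvRun a b alo blo i j ≤ (pvSpecBest a b alo ahi blo bhi).2.2 := by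
  intro i j hi1 hi2 hj1 hj2
  unfold pvSpecBest
  have hmemi : i ∈ List.range' alo (ahi - alo) := by
    rw [List.mem_range'_1]; omega
  have hmemj : j ∈ List.range' blo (bhi - blo) := by
    rw [List.mem_range'_1]; omega
  -- peel the outer fold at i
  clear hi1 hi2
  generalize (alo, blo, 0) = best0
  revert hmemi
  generalize List.range' alo (ahi - alo) = L
  intro hmemi
  induction L generalizing best0 with
  | nil => simp at hmemi
  | cons i0 t ih =>
      rcases List.mem_cons.mp hmemi with h | h
      · subst h
        simp only [List.foldl_cons]
        refine le_trans ?_ (pvInner_k_mono a b alo blo bhi t _)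
        exact pvFoldUpd_ge a b alo blo _ _ best0 j hmemj
      · simp only [List.foldl_cons]
        exact ih _ h

theorem pvSpecBest_bounds (a b : List String) (alo ahi blo bhi : Nat) :
    ((pvSpecBest a b alo ahi blo bhi).2.2 = 0 ∧
      (pvSpecBest a b alo ahi blo bhi).1 = alo ∧ (pvSpecBest a b alo ahi blo bhi).2.1 = blo) ∨
    (1 ≤ (pvSpecBest a b alo ahi blo bhi).2.2 ∧
      alo ≤ (pvSpecBest a b alo ahi blo bhi).1 ∧ blo ≤ (pvSpecBest a b alo ahi blo bhi).2.1 ∧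
      (pvSpecBest a b alo ahi blo bhi).1 + (pvSpecBest a b alo ahi blo bhi).2.2 ≤ ahi ∧
      (pvSpecBest a b alo ahi blo bhi).2.1 + (pvSpecBest a b alo ahi blo bhi).2.2 ≤ bhi) := by
  rcases pvSpecBest_P a b alo ahi blo bhi with h | ⟨i, j, h1, h2, h3, h4, h5, h6, h7, h8⟩
  · left; rw [h]; exact ⟨rfl, rfl, rfl⟩
  · right
    have hle := pvRun_le a b alo blo i j
    refine ⟨h6, by omega, by omega, by omega, by omega⟩

theorem pvSpecBest_empty (a b : List String) (alo ahi blo bhi : Nat)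
    (h : alo = ahi ∨ blo = bhi) : pvSpecBest a b alo ahi blo bhi = (alo, blo, 0) := by
  rcases h with h | h
  · unfold pvSpecBest
    rw [h, Nat.sub_self]
    rfl
  · unfold pvSpecBest
    have hinner : ∀ i best, pvInnerSpec a b alo blo bhi i best = best := by
      intro i best
      unfold pvInnerSpec
      rw [h, Nat.sub_self]
      rfl
    induction (List.range' alo (ahi - alo)) with
    | nil => rfl
    | cons i t ih => rw [List.foldl_cons, hinner]; exact ih

-- ===== the extension loops of find_longest_match do nothing on a maximal run =====

theorem pvExt_noLo (a b : List String) (alo ahi blo bhi : Nat) :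
    ¬(alo < (pvSpecBest a b alo ahi blo bhi).1 ∧ blo < (pvSpecBest a b alo ahi blo bhi).2.1 ∧
      a.getD ((pvSpecBest a b alo ahi blo bhi).1 - 1) "" =
        b.getD ((pvSpecBest a b alo ahi blo bhi).2.1 - 1) "") := by
  intro ⟨h1, h2, h3⟩
  rcases pvSpecBest_P a b alo ahi blo bhi with hP | ⟨i, j, hi1, hi2, hj1, hj2, hrun, hk, hbi, hbj⟩
  · rw [hP] at h1
    simp only at h1
    exact absurd h1 (lt_irrefl alo)
  · have hle := pvRun_le a b alo blo i j
    have hchain : ∀ t, t ≤ (pvSpecBest a b alo ahi blo bhi).2.2 →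
        a.getD (i - t) "" = b.getD (j - t) "" := by
      intro t ht
      rcases lt_or_eq_of_le ht with h | h
      · exact pvRun_chain a b alo blo i j t (by omega)
      · subst h
        have e1 : i - (pvSpecBest a b alo ahi blo bhi).2.2
            = (pvSpecBest a b alo ahi blo bhi).1 - 1 := by omega
        have e2 : j - (pvSpecBest a b alo ahi blo bhi).2.2
            = (pvSpecBest a b alo ahi blo bhi).2.1 - 1 := by omega
        rw [e1, e2]; exact h3
    have hge := pvRun_ge a b alo blo ((pvSpecBest a b alo ahi blo bhi).2.2) i j hchain
      (by omega) (by omega)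
    omega

theorem pvExt_noHi (a b : List String) (alo ahi blo bhi : Nat) :
    ¬((pvSpecBest a b alo ahi blo bhi).1 + (pvSpecBest a b alo ahi blo bhi).2.2 < ahi ∧
      (pvSpecBest a b alo ahi blo bhi).2.1 + (pvSpecBest a b alo ahi blo bhi).2.2 < bhi ∧
      a.getD ((pvSpecBest a b alo ahi blo bhi).1 + (pvSpecBest a b alo ahi blo bhi).2.2) "" =
        b.getD ((pvSpecBest a b alo ahi blo bhi).2.1 + (pvSpecBest a b alo ahi blo bhi).2.2) "") := by
  intro ⟨h1, h2, h3⟩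
  rcases pvSpecBest_P a b alo ahi blo bhi with hP | ⟨i, j, hi1, hi2, hj1, hj2, hrun, hk, hbi, hbj⟩
  · rw [hP] at h1 h2 h3
    simp only at h1 h2 h3
    have hge := pvRun_ge a b alo blo 0 alo blo
      (fun t ht => by obtain rfl := Nat.le_zero.mp ht; simpa using h3)
      (by omega) (by omega)
    have hmax := pvSpecBest_max a b alo ahi blo bhi alo blo (le_refl _) (by omega) (le_refl _) (by omega)
    rw [hP] at hmax
    simp only at hmax
    omega
  · have hle := pvRun_le a b alo blo i j
    have hi' : (pvSpecBest a b alo ahi blo bhi).1 + (pvSpecBest a b alo ahi blo bhi).2.2 = i + 1 := by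
      omega
    have hj' : (pvSpecBest a b alo ahi blo bhi).2.1 + (pvSpecBest a b alo ahi blo bhi).2.2 = j + 1 := by
      omega
    rw [hi'] at h1
    rw [hj'] at h2
    rw [hi', hj'] at h3
    have hchain : ∀ t, t ≤ (pvSpecBest a b alo ahi blo bhi).2.2 →
        a.getD (i + 1 - t) "" = b.getD (j + 1 - t) "" := by
      intro t ht
      cases t with
      | zero => simpa using h3
      | succ s =>
          have := pvRun_chain a b alo blo i j s (by omega)
          simpa [show i + 1 - (s + 1) = i - s by omega,
            show j + 1 - (s + 1) = j - s by omega] using this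
    have hge := pvRun_ge a b alo blo ((pvSpecBest a b alo ahi blo bhi).2.2) (i + 1) (j + 1)
      hchain (by omega) (by omega)
    have hmax := pvSpecBest_max a b alo ahi blo bhi (i + 1) (j + 1)
      (by omega) (by omega) (by omega) (by omega)
    omega

theorem pvExtLo_noop (a b : List String) (alo blo bi bj k : Nat)
    (h : ¬(alo < bi ∧ blo < bj ∧ a.getD (bi - 1) "" = b.getD (bj - 1) "")) :
    pvExtLo a b [] alo blo false bi bj k = (bi, bj, k) := by
  cases bi with
  | zero => rfl
  | succ m =>
      rw [pvExtLo, if_neg]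
      intro ⟨h1, h2, _, h4⟩
      exact h ⟨h1, h2, by simpa using h4⟩

theorem pvExtLo_junk_noop (a b : List String) (alo blo bi bj k : Nat) :
    pvExtLo a b [] alo blo true bi bj k = (bi, bj, k) := by
  cases bi with
  | zero => rfl
  | succ m => rw [pvExtLo, if_neg]; intro ⟨_, _, h3, _⟩; simp at h3

theorem pvExtHi_noop (a b : List String) (ahi bhi bi bj k fuel : Nat)
    (h : ¬(bi + k < ahi ∧ bj + k < bhi ∧ a.getD (bi + k) "" = b.getD (bj + k) "")) :
    pvExtHi a b [] ahi bhi false bi bj fuel k = k := by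
  cases fuel with
  | zero => rfl
  | succ f =>
      rw [pvExtHi, if_neg]
      intro ⟨h1, h2, _, h4⟩
      exact h ⟨h1, h2, by simpa using h4⟩

theorem pvExtHi_junk_noop (a b : List String) (ahi bhi bi bj k fuel : Nat) :
    pvExtHi a b [] ahi bhi true bi bj fuel k = k := by
  cases fuel with
  | zero => rfl
  | succ f => rw [pvExtHi, if_neg]; intro ⟨_, _, h3, _⟩; simp at h3

-- ===== pvIdxs and the raw b2j index =====

theorem pvIdxs_mem (b : List String) (elt : String) (j : Nat) :
    j ∈ pvIdxs b elt ↔ j < b.length ∧ b.getD j "" = elt := by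
  simp [pvIdxs, List.mem_filter, List.mem_range']

theorem pvIdxs_sorted (b : List String) (elt : String) :
    (pvIdxs b elt).Pairwise (· < ·) := by
  exact List.Pairwise.filter _ (by simpa using List.pairwise_lt_range' (s := 0) (n := b.length) 1)

theorem pvRawFold_zip (b : List String) :
    ∀ (n : Nat) (d : PySem.Dict String (List Nat)),
      (b.foldl
        (fun (st : Nat × PySem.Dict String (List Nat)) elt =>
          (st.1 + 1, st.2.modify elt [] (fun l => l ++ [st.1])))
        (n, d)).2
      = ((b.zipIdx n).foldl (fun d p => d.modify p.1 [] (fun l => l ++ [p.2])) d) := by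
  induction b with
  | nil => intro n d; rfl
  | cons x t ih =>
      intro n d
      rw [List.zipIdx_cons, List.foldl_cons, List.foldl_cons]
      exact ih (n + 1) _

theorem pvZipIdx_filter (elt : String) :
    ∀ (b : List String) (n : Nat),
      (((b.zipIdx n).filter (fun p => p.1 == elt)).map (fun p => p.2))
        = (List.range' n b.length).filter (fun j => decide (b.getD (j - n) "" = elt)) := by
  intro b
  induction b with
  | nil => intro n; rfl
  | cons x t ih =>
      intro n
      rw [List.zipIdx_cons]
      have hrange : List.range' n (x :: t).length = n :: List.range' (n + 1) t.length := by
        simp [List.range'_succ]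
      rw [hrange]
      have htail : (List.range' (n + 1) t.length).filter
            (fun j => decide ((x :: t).getD (j - n) "" = elt))
          = (List.range' (n + 1) t.length).filter
            (fun j => decide (t.getD (j - (n + 1)) "" = elt)) := by
        apply List.filter_congr
        intro j hj
        rw [List.mem_range'_1] at hj
        have : j - n = (j - (n + 1)) + 1 := by omega
        rw [this, List.getD_cons_succ]
      rw [List.filter_cons, List.filter_cons, htail, ← ih (n + 1)]
      by_cases hx : x = elt
      · simp [hx]
      · have h1 : (x == elt) = false := by simpa using hx
        have h2 : decide ((x :: t).getD (n - n) "" = elt) = false := by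
          simp [Nat.sub_self]
          exact hx
        rw [h1, h2]
        simp

theorem pvRawB2j_getD (b : List String) (elt : String) :
    (pvRawB2j b).getD elt [] = pvIdxs b elt := by
  unfold pvRawB2j
  rw [pvRawFold_zip b 0 PySem.Dict.empty]
  rw [PySem.Dict.getD_foldl_modify_append]
  rw [PySem.Dict.getD_empty]
  rw [List.nil_append]
  unfold pvIdxs
  rw [pvZipIdx_filter elt b 0]
  simp

theorem pvRawB2j_nodup_keys (b : List String) : (pvRawB2j b).keys.Nodup := by
  unfold pvRawB2j
  rw [pvRawFold_zip b 0 PySem.Dict.empty]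
  exact PySem.Dict.nodup_keys_foldl_modify_key _ _ _ _ _ (by simp [PySem.Dict.keys_empty])

theorem pvIdxs_length (b : List String) (elt : String) :
    (pvIdxs b elt).length = b.count elt := by
  unfold pvIdxs
  have hz := pvZipIdx_filter elt b 0
  simp only [Nat.sub_zero] at hz
  rw [← hz]
  rw [List.length_map, ← List.countP_eq_length_filter]
  rw [show b.count elt = List.countP (fun y => y == elt) b from rfl]
  conv_rhs => rw [← List.zipIdx_map_fst 0 b]
  rw [List.countP_map]
  rfl

theorem pv_fold_add_id {ntest : Nat} (s : PySem.Set String) :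
    ∀ (L : List (String × List Nat)), (∀ p ∈ L, ¬ ntest < p.2.length) →
      (L.foldl (fun (s : PySem.Set String) p =>
        if ntest < p.2.length then PySem.Set.add s p.1 else s) s) = s := by
  intro L
  induction L generalizing s with
  | nil => intro _; rfl
  | cons p t ih =>
      intro h
      rw [List.foldl_cons, if_neg (h p (by simp))]
      exact ih s (fun q hq => h q (by simp [hq]))

theorem pvChainB_eq_raw (b : List String)
    (h : b.length < 200 ∨ ∀ l ∈ b, b.count l ≤ b.length / 100 + 1) :
    pvChainB b = pvRawB2j b := by
  unfold pvChainB
  simp only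
  have hraw : (b.foldl
      (fun (st : Nat × PySem.Dict String (List Nat)) elt =>
        (st.1 + 1, st.2.modify elt [] (fun l => l ++ [st.1])))
      (0, PySem.Dict.empty)).2 = pvRawB2j b := rfl
  by_cases hn : 200 ≤ b.length
  · rw [if_pos hn]
    have hall : ∀ p ∈ (pvRawB2j b).items, ¬ (b.length / 100 + 1) < p.2.length := by
      intro p hp
      obtain ⟨k, v⟩ := p
      have hv : (pvRawB2j b).getD k [] = v :=
        PySem.Dict.getD_of_mem_items _ hp (pvRawB2j_nodup_keys b) []
      simp only
      rw [← hv, pvRawB2j_getD, pvIdxs_length]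
      rcases h with h | h
      · omega
      · by_cases hmem : k ∈ b
        · have := h k hmem; omega
        · rw [List.count_eq_zero_of_not_mem hmem]; omega
    rw [hraw, pv_fold_add_id PySem.Set.empty _ hall]
    rfl
  · rw [if_neg hn, hraw]
    rfl

-- ===== the A-side scan equals the spec fold =====

-- the previous DP row, as find_longest_match's j2len dictionary holds it before iteration i
def pvPrevF (a b : List String) (alo blo bhi i : Nat) (z : Int) : Nat :=
  if 0 ≤ z ∧ alo < i ∧ blo ≤ z.toNat ∧ z.toNat < bhi then pvRun a b alo blo (i - 1) z.toNat
  else 0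

theorem pvUpd_nonmatch (a b : List String) (alo blo : Nat) (best : Nat × Nat × Nat) (i j : Nat)
    (h : ¬ a.getD i "" = b.getD j "") : pvUpd a b alo blo best i j = best := by
  have h0 : pvRun a b alo blo i j = 0 := by rw [pvRun_eq, if_neg h]
  simp only [pvUpd, h0]
  rw [if_neg (by omega)]

theorem pvRowK (a b : List String) (alo blo bhi i j : Nat) (d : PySem.Dict Int Nat)
    (hd : ∀ z, d.getD z 0 = pvPrevF a b alo blo bhi i z)
    (hm : a.getD i "" = b.getD j "") (hj2 : j < bhi) :
    d.getD ((j : Int) - 1) 0 + 1 = pvRun a b alo blo i j := by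
  rw [pvRun_eq, if_pos hm]
  cases j with
  | zero =>
      rw [hd]
      unfold pvPrevF
      rw [if_neg (by intro ⟨h0, _⟩; omega), if_neg (by omega)]
  | succ m =>
      have hz : ((m + 1 : Nat) : Int) - 1 = (m : Int) := by push_cast; ring
      rw [hz, hd]
      unfold pvPrevF
      simp only [Int.toNat_natCast, Nat.add_sub_cancel]
      by_cases hai : alo < i
      · by_cases hbm : blo ≤ m
        · rw [if_pos ⟨by omega, hai, hbm, by omega⟩, if_pos ⟨hai, by omega⟩]
        · rw [if_neg (by omega), if_neg (by omega)]
      · rw [if_neg (by omega), if_neg (by omega)]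

theorem pvDictFold_getD (d : PySem.Dict Int Nat) (blo : Nat) :
    ∀ (L : List Nat) (nd : PySem.Dict Int Nat) (z : Int),
      (L.foldl
        (fun nd j => if j < blo then nd else nd.insert (j : Int) (d.getD ((j : Int) - 1) 0 + 1))
        nd).getD z 0
      = if ∃ j ∈ L, ¬ j < blo ∧ z = (j : Int) then d.getD (z - 1) 0 + 1 else nd.getD z 0 := by
  intro L
  induction L with
  | nil => intro nd z; rw [if_neg (by simp)]; rfl
  | cons j t ih =>
      intro nd z
      rw [List.foldl_cons]
      by_cases hj : j < blo
      · rw [if_pos hj, ih]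
        by_cases hex : ∃ x ∈ t, ¬ x < blo ∧ z = (x : Int)
        · rw [if_pos hex, if_pos (by obtain ⟨x, hx1, hx2⟩ := hex; exact ⟨x, by simp [hx1], hx2⟩)]
        · rw [if_neg hex, if_neg ?_]
          intro ⟨x, hx1, hx2⟩
          rcases List.mem_cons.mp hx1 with rfl | hx1
          · exact hx2.1 hj
          · exact hex ⟨x, hx1, hx2⟩
      · rw [if_neg hj, ih]
        by_cases hex : ∃ x ∈ t, ¬ x < blo ∧ z = (x : Int)
        · rw [if_pos hex, if_pos (by obtain ⟨x, hx1, hx2⟩ := hex; exact ⟨x, by simp [hx1], hx2⟩)]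
        · rw [if_neg hex]
          rw [PySem.Dict.getD_insert]
          by_cases hz : z = (j : Int)
          · rw [if_pos hz, if_pos ⟨j, by simp, hj, hz⟩, hz]
          · rw [if_neg hz, if_neg ?_]
            intro ⟨x, hx1, hx2⟩
            rcases List.mem_cons.mp hx1 with rfl | hx1
            · exact hz hx2.2
            · exact hex ⟨x, hx1, hx2⟩

theorem pv_takeWhile_filter (bhi : Nat) :
    ∀ (js : List Nat), js.Pairwise (· < ·) →
      js.takeWhile (fun j => decide (j < bhi)) = js.filter (fun j => decide (j < bhi)) := by
  intro js
  induction js with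
  | nil => intro _; rfl
  | cons j t ih =>
      intro hp
      have hall : ∀ x ∈ t, j < x := fun x hx => (List.pairwise_cons.mp hp).1 x hx
      have ht := ih (List.pairwise_cons.mp hp).2
      by_cases hj : j < bhi
      · rw [List.takeWhile_cons, List.filter_cons]
        simp only [decide_eq_true hj]
        rw [ht]
        rfl
      · rw [List.takeWhile_cons, List.filter_cons]
        simp only [decide_eq_false hj]
        simp only [if_false, Bool.false_eq_true]
        rw [List.filter_eq_nil_iff.mpr (fun x hx => by
          have := hall x hx
          simp only [decide_eq_true_eq]
          omega)]

theorem pv_foldl_skip {β : Type} (blo : Nat) (f : β → Nat → β) :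
    ∀ (L : List Nat) (s : β),
      L.foldl (fun s j => if j < blo then s else f s j) s
        = (L.filter (fun j => decide (blo ≤ j))).foldl f s := by
  intro L
  induction L with
  | nil => intro s; rfl
  | cons j t ih =>
      intro s
      rw [List.foldl_cons, List.filter_cons]
      by_cases hj : j < blo
      · rw [if_pos hj]
        simp only [decide_eq_false (by omega : ¬ blo ≤ j), Bool.false_eq_true, if_false]
        exact ih s
      · rw [if_neg hj]
        simp only [decide_eq_true (by omega : blo ≤ j), if_true]
        rw [List.foldl_cons]
        exact ih (f s j)

theorem pv_foldl_filter_id {α β : Type} (p : α → Bool) (f : β → α → β)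
    (hid : ∀ s x, p x = false → f s x = s) :
    ∀ (L : List α) (s : β), L.foldl f s = (L.filter p).foldl f s := by
  intro L
  induction L with
  | nil => intro s; rfl
  | cons x t ih =>
      intro s
      rw [List.foldl_cons, List.filter_cons]
      cases hp : p x
      · simp only [Bool.false_eq_true, if_false]
        rw [← ih s, hid s x hp]
      · simp only [if_true]
        rw [List.foldl_cons]
        exact ih (f s x)

theorem pv_sorted_eq_of_mem_iff (L1 L2 : List Nat)
    (h1 : L1.Pairwise (· < ·)) (h2 : L2.Pairwise (· < ·))
    (hmem : ∀ x, x ∈ L1 ↔ x ∈ L2) : L1 = L2 := by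
  have hperm : L1.Perm L2 :=
    (List.perm_ext_iff_of_nodup (h1.imp ne_of_lt) (h2.imp ne_of_lt)).mpr hmem
  exact List.eq_of_perm_of_sorted (fun x y _ _ hxy hyx => by omega)
    (h1.imp le_of_lt) (h2.imp le_of_lt) hperm

-- the per-row list of matching positions, restricted to the window
theorem pv_rows_eq (a b : List String) (alo blo bhi i : Nat)
    (hb : blo ≤ bhi) (hbl : bhi ≤ b.length) :
    ((pvIdxs b (a.getD i "")).filter (fun j => decide (j < bhi))).filter
        (fun j => decide (blo ≤ j))
      = (List.range' blo (bhi - blo)).filter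
        (fun j => decide (a.getD i "" = b.getD j "")) := by
  apply pv_sorted_eq_of_mem_iff
  · exact ((pvIdxs_sorted b (a.getD i "")).filter _).filter _
  · exact List.Pairwise.filter _
      (by simpa using List.pairwise_lt_range' (s := blo) (n := bhi - blo) 1)
  · intro x
    simp only [List.mem_filter, pvIdxs_mem, List.mem_range'_1, decide_eq_true_eq]
    constructor
    · rintro ⟨⟨⟨hlen, heq⟩, hlt⟩, hge⟩
      exact ⟨⟨hge, by omega⟩, heq.symm⟩
    · rintro ⟨⟨hge, hlt⟩, heq⟩
      exact ⟨⟨⟨by omega, heq.symm⟩, by omega⟩, hge⟩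

theorem pvFlmInner_eq (a b : List String) (alo blo bhi i : Nat) (d : PySem.Dict Int Nat)
    (hblo : blo ≤ bhi)
    (hd : ∀ z, d.getD z 0 = pvPrevF a b alo blo bhi i z) :
    ∀ (js : List Nat) (nd : PySem.Dict Int Nat) (best : Nat × Nat × Nat),
      (∀ j ∈ js, b.getD j "" = a.getD i "") →
      pvFlmInner blo bhi d i js nd best
        = ((js.takeWhile (fun j => decide (j < bhi))).foldl
            (fun nd j => if j < blo then nd
              else nd.insert (j : Int) (d.getD ((j : Int) - 1) 0 + 1)) nd,
           (js.takeWhile (fun j => decide (j < bhi))).foldl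
            (fun best j => if j < blo then best else pvUpd a b alo blo best i j) best) := by
  intro js
  induction js with
  | nil => intro nd best _; rfl
  | cons j t ih =>
      intro nd best hm
      rw [List.takeWhile_cons]
      by_cases h2 : j < bhi
      · rw [if_pos (by simpa using h2)]
        simp only [List.foldl_cons]
        by_cases h1 : j < blo
        · rw [pvFlmInner, if_pos h1]
          rw [ih nd best (fun x hx => hm x (by simp [hx]))]
          rw [if_pos h1, if_pos h1]
        · rw [pvFlmInner, if_neg h1, if_neg (by omega)]
          simp only
          rw [ih _ _ (fun x hx => hm x (by simp [hx]))]
          rw [if_neg h1, if_neg h1]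
          have hk : d.getD ((j : Int) - 1) 0 + 1 = pvRun a b alo blo i j :=
            pvRowK a b alo blo bhi i j d hd (hm j (by simp)).symm h2
          have hbest : (if best.2.2 < d.getD ((j : Int) - 1) 0 + 1 then
              (i + 1 - (d.getD ((j : Int) - 1) 0 + 1), j + 1 - (d.getD ((j : Int) - 1) 0 + 1),
                d.getD ((j : Int) - 1) 0 + 1)
              else best) = pvUpd a b alo blo best i j := by
            rw [hk]
            rfl
          rw [hbest]
      · rw [if_neg (by simpa using h2)]
        rw [pvFlmInner, if_neg (by omega), if_pos (by omega)]
        rfl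

-- one full row of find_longest_match: the result dictionary is the next DP row and the
-- running best advances by the inner spec fold
theorem pvFlmInner_full (a b : List String) (alo blo bhi i : Nat) (d : PySem.Dict Int Nat)
    (hb : blo ≤ bhi) (hbl : bhi ≤ b.length) (hi : alo ≤ i)
    (hd : ∀ z, d.getD z 0 = pvPrevF a b alo blo bhi i z) (best : Nat × Nat × Nat) :
    (pvFlmInner blo bhi d i (pvIdxs b (a.getD i "")) PySem.Dict.empty best).2
        = pvInnerSpec a b alo blo bhi i best ∧
    ∀ z, (pvFlmInner blo bhi d i (pvIdxs b (a.getD i "")) PySem.Dict.empty best).1.getD z 0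
        = pvPrevF a b alo blo bhi (i + 1) z := by
  rw [pvFlmInner_eq a b alo blo bhi i d hb hd (pvIdxs b (a.getD i "")) PySem.Dict.empty best
    (fun j hj => ((pvIdxs_mem b (a.getD i "") j).mp hj).2)]
  rw [pv_takeWhile_filter bhi (pvIdxs b (a.getD i "")) (pvIdxs_sorted b (a.getD i ""))]
  constructor
  · -- best component
    simp only
    rw [pv_foldl_skip blo (fun best j => pvUpd a b alo blo best i j), pv_rows_eq a b alo blo bhi i hb hbl]
    unfold pvInnerSpec
    rw [← pv_foldl_filter_id (fun j => decide (a.getD i "" = b.getD j ""))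
      (fun best j => pvUpd a b alo blo best i j)
      (fun s j hne => pvUpd_nonmatch a b alo blo s i j (by simpa using hne))]
  · -- dictionary component
    intro z
    simp only
    rw [pvDictFold_getD d blo]
    by_cases hex : ∃ j ∈ (pvIdxs b (a.getD i "")).filter (fun j => decide (j < bhi)),
        ¬ j < blo ∧ z = (j : Int)
    · rw [if_pos hex]
      obtain ⟨j, hjmem, hjge, rfl⟩ := hex
      rw [List.mem_filter] at hjmem
      obtain ⟨hjidx, hjlt⟩ := hjmem
      rw [pvIdxs_mem] at hjidx
      have hk : d.getD ((j : Int) - 1) 0 + 1 = pvRun a b alo blo i j :=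
        pvRowK a b alo blo bhi i j d hd hjidx.2.symm (by simpa using hjlt)
      rw [hk]
      unfold pvPrevF
      rw [if_pos ⟨by omega, by omega, by omega, by simpa using hjlt⟩]
      simp
    · rw [if_neg hex, PySem.Dict.getD_empty]
      unfold pvPrevF
      by_cases hc : 0 ≤ z ∧ alo < i + 1 ∧ blo ≤ z.toNat ∧ z.toNat < bhi
      · rw [if_pos hc]
        simp only [Nat.add_sub_cancel]
        by_cases hmatch : a.getD i "" = b.getD z.toNat ""
        · exfalso
          apply hex
          refine ⟨z.toNat, ?_, by omega, by omega⟩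
          rw [List.mem_filter, pvIdxs_mem]
          exact ⟨⟨by omega, hmatch.symm⟩, by simp; omega⟩
        · rw [pvRun_eq, if_neg hmatch]
      · rw [if_neg hc]

theorem pvFlmScan_spec (a b : List String) (alo ahi blo bhi : Nat)
    (hb : blo ≤ bhi) (hbl : bhi ≤ b.length) :
    pvFlmScan a (pvRawB2j b) alo ahi blo bhi = pvSpecBest a b alo ahi blo bhi := by
  unfold pvFlmScan pvSpecBest
  suffices h : ∀ (n i0 : Nat) (st : PySem.Dict Int Nat × (Nat × Nat × Nat)), alo ≤ i0 →
      (∀ z, st.1.getD z 0 = pvPrevF a b alo blo bhi i0 z) →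
      ((List.range' i0 n).foldl
        (fun (st : PySem.Dict Int Nat × (Nat × Nat × Nat)) i =>
          pvFlmInner blo bhi st.1 i ((pvRawB2j b).getD (a.getD i "") []) PySem.Dict.empty st.2)
        st).2
      = (List.range' i0 n).foldl (fun best i => pvInnerSpec a b alo blo bhi i best) st.2 by
    exact h (ahi - alo) alo (PySem.Dict.empty, (alo, blo, 0)) (le_refl _)
      (fun z => by
        rw [PySem.Dict.getD_empty]
        unfold pvPrevF
        rw [if_neg (by intro ⟨_, h2, _⟩; omega)])
  intro n
  induction n with
  | zero => intro i0 st _ _; rfl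
  | succ m ih =>
      intro i0 st hi0 hd
      rw [List.range'_succ, List.foldl_cons, List.foldl_cons]
      rw [pvRawB2j_getD]
      have hfull := pvFlmInner_full a b alo blo bhi i0 st.1 hb hbl hi0 hd st.2
      rw [show pvFlmInner blo bhi st.1 i0 (pvIdxs b (a.getD i0 "")) PySem.Dict.empty st.2
          = ((pvFlmInner blo bhi st.1 i0 (pvIdxs b (a.getD i0 "")) PySem.Dict.empty st.2).1,
             (pvFlmInner blo bhi st.1 i0 (pvIdxs b (a.getD i0 "")) PySem.Dict.empty st.2).2)
          from rfl]
      rw [hfull.1]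
      exact ih (i0 + 1) _ (by omega) hfull.2

theorem pvFLM_spec (a b : List String) (alo ahi blo bhi : Nat)
    (hb : blo ≤ bhi) (hbl : bhi ≤ b.length) :
    pvFindLongestMatch a b (pvRawB2j b) [] alo ahi blo bhi = pvSpecBest a b alo ahi blo bhi := by
  have hn1 := pvExt_noLo a b alo ahi blo bhi
  have hn2 := pvExt_noHi a b alo ahi blo bhi
  rcases hspec : pvSpecBest a b alo ahi blo bhi with ⟨bi, bj, k⟩
  rw [hspec] at hn1 hn2
  simp only at hn1 hn2
  simp only [pvFindLongestMatch]
  rw [pvFlmScan_spec a b alo ahi blo bhi hb hbl, hspec]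
  simp only
  rw [pvExtLo_noop a b alo blo bi bj k hn1]
  simp only
  rw [pvExtHi_noop a b ahi bhi bi bj k ahi hn2]
  rw [pvExtLo_junk_noop, pvExtHi_junk_noop]

-- ===== the B-side scan equals the spec fold =====

-- the inner-loop step of Source B's longest_common_run (named for the proofs; pvLcr's literal lambda)
def pvLcrStep (a b : List String) (blo i : Nat) (prev : List Nat)
    (st2 : (Nat × Nat × Nat) × List Nat) (j : Nat) : (Nat × Nat × Nat) × List Nat :=
  if a.getD i "" = b.getD j "" then
    let run := (if blo < j then prev.getD (j - blo - 1) 0 else 0) + 1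
    let best := if st2.1.2.2 < run then (i + 1 - run, j + 1 - run, run) else st2.1
    (best, st2.2.set (j - blo) run)
  else st2

theorem pvLcrInner_spec (a b : List String) (alo blo bhi i : Nat) (prev : List Nat)
    (hprev : ∀ t, t < bhi - blo →
      prev.getD t 0 = if alo < i then pvRun a b alo blo (i - 1) (blo + t) else 0) :
    ∀ (m j0 : Nat) (best : Nat × Nat × Nat) (cur : List Nat), blo ≤ j0 → j0 + m = bhi →
      cur.length = bhi - blo →
      (∀ t, t < bhi - blo →
        cur.getD t 0 = if blo + t < j0 then pvRun a b alo blo i (blo + t) else 0) →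
      ((List.range' j0 m).foldl (pvLcrStep a b blo i prev) (best, cur)).1
          = (List.range' j0 m).foldl (fun best j => pvUpd a b alo blo best i j) best ∧
        ((List.range' j0 m).foldl (pvLcrStep a b blo i prev) (best, cur)).2.length = bhi - blo ∧
        ∀ t, t < bhi - blo →
          ((List.range' j0 m).foldl (pvLcrStep a b blo i prev) (best, cur)).2.getD t 0
            = pvRun a b alo blo i (blo + t) := by
  intro m
  induction m with
  | zero =>
      intro j0 best cur hj0 hsum hlen hcur
      refine ⟨rfl, hlen, fun t ht => ?_⟩
      have := hcur t ht
      rw [if_pos (by omega)] at this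
      exact this
  | succ m ih =>
      intro j0 best cur hj0 hsum hlen hcur
      rw [List.range'_succ, List.foldl_cons, List.foldl_cons]
      by_cases hmatch : a.getD i "" = b.getD j0 ""
      · have hrun : (if blo < j0 then prev.getD (j0 - blo - 1) 0 else 0) + 1
            = pvRun a b alo blo i j0 := by
          rw [pvRun_eq, if_pos hmatch]
          by_cases hbj : blo < j0
          · rw [if_pos hbj]
            rw [hprev (j0 - blo - 1) (by omega)]
            rw [show blo + (j0 - blo - 1) = j0 - 1 by omega]
            by_cases hai : alo < i
            · rw [if_pos hai, if_pos ⟨hai, hbj⟩]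
            · rw [if_neg hai, if_neg (by tauto)]
          · rw [if_neg hbj, if_neg (by tauto)]
        have hstep : pvLcrStep a b blo i prev (best, cur) j0
            = (pvUpd a b alo blo best i j0, cur.set (j0 - blo) (pvRun a b alo blo i j0)) := by
          simp only [pvLcrStep]
          rw [if_pos hmatch]
          rw [hrun]
          rfl
        rw [hstep]
        apply ih (j0 + 1) _ _ (by omega) (by omega)
          (by rw [List.length_set]; exact hlen)
        intro t ht
        by_cases hteq : t = j0 - blo
        · subst hteq
          rw [List.getD_eq_getElem?_getD, List.getElem?_set_self (by omega), Option.getD_some]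
          rw [if_pos (by omega), show blo + (j0 - blo) = j0 by omega]
        · rw [List.getD_eq_getElem?_getD, List.getElem?_set_ne (by omega),
            ← List.getD_eq_getElem?_getD, hcur t ht]
          by_cases hlt : blo + t < j0
          · rw [if_pos hlt, if_pos (by omega)]
          · rw [if_neg hlt, if_neg (by omega)]
      · have hstep : pvLcrStep a b blo i prev (best, cur) j0 = (best, cur) := by
          simp only [pvLcrStep]
          rw [if_neg hmatch]
        rw [hstep, pvUpd_nonmatch a b alo blo best i j0 hmatch]
        apply ih (j0 + 1) best cur (by omega) (by omega) hlen
        intro t ht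
        rw [hcur t ht]
        by_cases hlt : blo + t < j0
        · rw [if_pos hlt, if_pos (by omega)]
        · rw [if_neg hlt]
          by_cases hlt2 : blo + t < j0 + 1
          · rw [if_pos hlt2]
            have hbt : blo + t = j0 := by omega
            rw [hbt, pvRun_eq, if_neg hmatch]
          · rw [if_neg hlt2]

theorem pvLcrOuter_spec (a b : List String) (alo blo bhi : Nat) (hb : blo ≤ bhi) :
    ∀ (n i0 : Nat) (st : (Nat × Nat × Nat) × List Nat), alo ≤ i0 →
      (∀ t, t < bhi - blo →
        st.2.getD t 0 = if alo < i0 then pvRun a b alo blo (i0 - 1) (blo + t) else 0) →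
      ((List.range' i0 n).foldl
        (fun (st : (Nat × Nat × Nat) × List Nat) i =>
          (List.range' blo (bhi - blo)).foldl (pvLcrStep a b blo i st.2)
            (st.1, List.replicate (bhi - blo) 0))
        st).1
      = (List.range' i0 n).foldl (fun best i => pvInnerSpec a b alo blo bhi i best) st.1 := by
  intro n
  induction n with
  | zero => intro i0 st _ _; rfl
  | succ m ih =>
      intro i0 st hi0 hprev
      rw [List.range'_succ, List.foldl_cons, List.foldl_cons]
      have hinner := pvLcrInner_spec a b alo blo bhi i0 st.2 hprev (bhi - blo) blo
        st.1 (List.replicate (bhi - blo) 0) (le_refl _) (by omega)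
        (by rw [List.length_replicate])
        (fun t ht => by
          rw [List.getD_eq_getElem?_getD, List.getElem?_replicate_of_lt (by omega)]
          rw [Option.getD_some, if_neg (by omega)])
      rw [show ((List.range' blo (bhi - blo)).foldl (pvLcrStep a b blo i0 st.2)
            (st.1, List.replicate (bhi - blo) 0))
          = (((List.range' blo (bhi - blo)).foldl (pvLcrStep a b blo i0 st.2)
              (st.1, List.replicate (bhi - blo) 0)).1,
             ((List.range' blo (bhi - blo)).foldl (pvLcrStep a b blo i0 st.2)
              (st.1, List.replicate (bhi - blo) 0)).2) from rfl]
      rw [hinner.1]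
      refine ih (i0 + 1) _ (by omega) ?_
      intro t ht
      have hc := hinner.2.2 t ht
      simp only at hc ⊢
      rw [hc, if_pos (by omega), Nat.add_sub_cancel]

theorem pvLcr_spec (a b : List String) (alo ahi blo bhi : Nat) :
    pvLcr a b alo ahi blo bhi = pvSpecBest a b alo ahi blo bhi := by
  by_cases hb : blo ≤ bhi
  · show ((List.range' alo (ahi - alo)).foldl
        (fun (st : (Nat × Nat × Nat) × List Nat) i =>
          (List.range' blo (bhi - blo)).foldl (pvLcrStep a b blo i st.2)
            (st.1, List.replicate (bhi - blo) 0))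
        ((alo, blo, 0), List.replicate (bhi - blo) 0)).1
      = pvSpecBest a b alo ahi blo bhi
    rw [pvLcrOuter_spec a b alo blo bhi hb (ahi - alo) alo
      ((alo, blo, 0), List.replicate (bhi - blo) 0) (le_refl _)
      (fun t ht => by
        rw [List.getD_eq_getElem?_getD, List.getElem?_replicate_of_lt (by omega)]
        rw [Option.getD_some, if_neg (by omega)])]
    rfl
  · -- degenerate window: no j positions at all
    have hw : bhi - blo = 0 := by omega
    show ((List.range' alo (ahi - alo)).foldl
        (fun (st : (Nat × Nat × Nat) × List Nat) i =>
          (List.range' blo (bhi - blo)).foldl (pvLcrStep a b blo i st.2)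
            (st.1, List.replicate (bhi - blo) 0))
        ((alo, blo, 0), List.replicate (bhi - blo) 0)).1
      = pvSpecBest a b alo ahi blo bhi
    rw [hw]
    have hfst : ∀ (L : List Nat) (st : (Nat × Nat × Nat) × List Nat),
        (L.foldl
          (fun (st : (Nat × Nat × Nat) × List Nat) i =>
            (List.range' blo 0).foldl (pvLcrStep a b blo i st.2)
              (st.1, List.replicate 0 0))
          st).1 = st.1 := by
      intro L
      induction L with
      | nil => intro st; rfl
      | cons i t ihL => intro st; rw [List.foldl_cons]; exact ihL _
    rw [hfst]
    unfold pvSpecBest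
    have hspec : ∀ (L : List Nat) (best : Nat × Nat × Nat),
        L.foldl (fun best i => pvInnerSpec a b alo blo bhi i best) best = best := by
      intro L
      induction L with
      | nil => intro best; rfl
      | cons i t ihL =>
          intro best
          rw [List.foldl_cons]
          rw [show pvInnerSpec a b alo blo bhi i best = best by
            unfold pvInnerSpec; rw [hw]; rfl]
          exact ihL best
    rw [hspec]
-- ===== the matching-block tree =====

-- facts about a nonzero best match inside a valid window
theorem pvBest_facts (a b : List String) (alo ahi blo bhi : Nat)
    (hk : (pvSpecBest a b alo ahi blo bhi).2.2 ≠ 0) :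
    1 ≤ (pvSpecBest a b alo ahi blo bhi).2.2 ∧
    alo ≤ (pvSpecBest a b alo ahi blo bhi).1 ∧ blo ≤ (pvSpecBest a b alo ahi blo bhi).2.1 ∧
    (pvSpecBest a b alo ahi blo bhi).1 + (pvSpecBest a b alo ahi blo bhi).2.2 ≤ ahi ∧
    (pvSpecBest a b alo ahi blo bhi).2.1 + (pvSpecBest a b alo ahi blo bhi).2.2 ≤ bhi := by
  rcases pvSpecBest_bounds a b alo ahi blo bhi with ⟨h0, _, _⟩ | h
  · exact absurd h0 hk
  · exact h

theorem pvInorder_degenerate (a b : List String) (fuel : Nat) (r : PvReg)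
    (h : r.1 = r.2.1 ∨ r.2.2.1 = r.2.2.2) : pvInorder a b fuel r = [] := by
  cases fuel with
  | zero => rfl
  | succ f =>
      obtain ⟨alo, ahi, blo, bhi⟩ := r
      simp only [pvInorder]
      rw [pvSpecBest_empty a b alo ahi blo bhi (by simpa using h)]
      rfl

theorem pvInorder_bounds (a b : List String) :
    ∀ fuel r, pvValid a b r →
      ∀ blk ∈ pvInorder a b fuel r,
        r.1 ≤ blk.1 ∧ blk.1 + blk.2.2 ≤ r.2.1 ∧
        r.2.2.1 ≤ blk.2.1 ∧ blk.2.1 + blk.2.2 ≤ r.2.2.2 ∧ 1 ≤ blk.2.2 := by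
  intro fuel
  induction fuel with
  | zero => intro r _ blk hblk; simp [pvInorder] at hblk
  | succ f ih =>
      intro r hv blk hblk
      obtain ⟨alo, ahi, blo, bhi⟩ := r
      simp only [pvInorder] at hblk
      by_cases hk : (pvSpecBest a b alo ahi blo bhi).2.2 = 0
      · rw [if_pos hk] at hblk; simp at hblk
      · rw [if_neg hk] at hblk
        obtain ⟨hk1, hbi, hbj, hbik, hbjk⟩ := pvBest_facts a b alo ahi blo bhi hk
        obtain ⟨hv1, hv2, hv3⟩ := hv
        simp only at hv1 hv2 hv3 ⊢
        rcases List.mem_append.mp hblk with hleft | hrest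
        · have := ih (alo, (pvSpecBest a b alo ahi blo bhi).1, blo,
            (pvSpecBest a b alo ahi blo bhi).2.1) ⟨by simpa using hbi, by simpa using hbj,
              by simp only; omega⟩ blk hleft
          simp only at this
          refine ⟨by omega, by omega, by omega, by omega, by omega⟩
        · rcases List.mem_cons.mp hrest with rfl | hright
          · exact ⟨hbi, hbik, hbj, hbjk, hk1⟩
          · have := ih ((pvSpecBest a b alo ahi blo bhi).1 + (pvSpecBest a b alo ahi blo bhi).2.2,
              ahi, (pvSpecBest a b alo ahi blo bhi).2.1 + (pvSpecBest a b alo ahi blo bhi).2.2,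
              bhi) ⟨by simp only; omega, by simp only; omega, by simp only; omega⟩ blk hright
            simp only at this
            refine ⟨by omega, by omega, by omega, by omega, by omega⟩

theorem pvInorder_sorted (a b : List String) :
    ∀ fuel r, pvValid a b r →
      (pvInorder a b fuel r).Pairwise (fun x y : Nat × Nat × Nat => x.1 < y.1) := by
  intro fuel
  induction fuel with
  | zero => intro r _; simp [pvInorder]
  | succ f ih =>
      intro r hv
      obtain ⟨alo, ahi, blo, bhi⟩ := r
      simp only [pvInorder]
      by_cases hk : (pvSpecBest a b alo ahi blo bhi).2.2 = 0
      · rw [if_pos hk]; exact List.Pairwise.nil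
      · rw [if_neg hk]
        obtain ⟨hk1, hbi, hbj, hbik, hbjk⟩ := pvBest_facts a b alo ahi blo bhi hk
        obtain ⟨hv1, hv2, hv3⟩ := hv
        simp only at hv1 hv2 hv3
        have hvL : pvValid a b (alo, (pvSpecBest a b alo ahi blo bhi).1, blo,
            (pvSpecBest a b alo ahi blo bhi).2.1) :=
          ⟨by simpa using hbi, by simpa using hbj, by simp only; omega⟩
        have hvR : pvValid a b ((pvSpecBest a b alo ahi blo bhi).1 +
            (pvSpecBest a b alo ahi blo bhi).2.2, ahi,
            (pvSpecBest a b alo ahi blo bhi).2.1 + (pvSpecBest a b alo ahi blo bhi).2.2, bhi) :=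
          ⟨by simp only; omega, by simp only; omega, by simp only; omega⟩
        have hbL := pvInorder_bounds a b f _ hvL
        have hbR := pvInorder_bounds a b f _ hvR
        rw [List.pairwise_append]
        refine ⟨ih _ hvL, ?_, ?_⟩
        · rw [List.pairwise_cons]
          refine ⟨fun y hy => ?_, ih _ hvR⟩
          have := hbR y hy
          simp only at this
          omega
        · intro x hx y hy
          have h1 := hbL x hx
          simp only at h1
          rcases List.mem_cons.mp hy with rfl | hy
          · omega
          · have h2 := hbR y hy
            simp only at h2
            omega

theorem pvInorder_stable_aux (a b : List String) :
    ∀ fuel, ∀ r, pvValid a b r → pvMeas r + 1 ≤ fuel →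
      pvInorder a b fuel r = pvInorder a b (pvMeas r + 1) r := by
  intro fuel
  induction fuel using Nat.strong_induction_on with
  | _ fuel ihf =>
      intro r hv hle
      obtain ⟨alo, ahi, blo, bhi⟩ := r
      cases fuel with
      | zero => omega
      | succ f =>
          simp only [pvInorder]
          by_cases hk : (pvSpecBest a b alo ahi blo bhi).2.2 = 0
          · rw [if_pos hk, if_pos hk]
          · rw [if_neg hk, if_neg hk]
            obtain ⟨hk1, hbi, hbj, hbik, hbjk⟩ := pvBest_facts a b alo ahi blo bhi hk
            obtain ⟨hv1, hv2, hv3⟩ := hv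
            simp only at hv1 hv2 hv3
            simp only [pvMeas] at hle ⊢
            have hvL : pvValid a b (alo, (pvSpecBest a b alo ahi blo bhi).1, blo,
                (pvSpecBest a b alo ahi blo bhi).2.1) :=
              ⟨by simpa using hbi, by simpa using hbj, by simp only; omega⟩
            have hvR : pvValid a b ((pvSpecBest a b alo ahi blo bhi).1 +
                (pvSpecBest a b alo ahi blo bhi).2.2, ahi,
                (pvSpecBest a b alo ahi blo bhi).2.1 + (pvSpecBest a b alo ahi blo bhi).2.2,
                bhi) :=
              ⟨by simp only; omega, by simp only; omega, by simp only; omega⟩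
            have hmL : pvMeas (alo, (pvSpecBest a b alo ahi blo bhi).1, blo,
                (pvSpecBest a b alo ahi blo bhi).2.1) + 1
                ≤ (ahi - alo) + (bhi - blo) := by
              simp only [pvMeas]; omega
            have hmR : pvMeas ((pvSpecBest a b alo ahi blo bhi).1 +
                (pvSpecBest a b alo ahi blo bhi).2.2, ahi,
                (pvSpecBest a b alo ahi blo bhi).2.1 + (pvSpecBest a b alo ahi blo bhi).2.2,
                bhi) + 1 ≤ (ahi - alo) + (bhi - blo) := by
              simp only [pvMeas]; omega
            have hL : pvInorder a b f _ = pvInorder a b ((ahi - alo) + (bhi - blo)) _ :=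
              (ihf f (by omega) _ hvL (by omega)).trans
                (ihf ((ahi - alo) + (bhi - blo)) (by omega) _ hvL (by omega)).symm
            have hR : pvInorder a b f _ = pvInorder a b ((ahi - alo) + (bhi - blo)) _ :=
              (ihf f (by omega) _ hvR (by omega)).trans
                (ihf ((ahi - alo) + (bhi - blo)) (by omega) _ hvR (by omega)).symm
            rw [hL, hR]

theorem pvInorder_stable (a b : List String) :
    ∀ fuel1 fuel2 r, pvValid a b r → pvMeas r + 1 ≤ fuel1 → pvMeas r + 1 ≤ fuel2 →
      pvInorder a b fuel1 r = pvInorder a b fuel2 r := by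
  intro fuel1 fuel2 r hv h1 h2
  rw [pvInorder_stable_aux a b fuel1 r hv h1, pvInorder_stable_aux a b fuel2 r hv h2]

theorem pvMeas_def (alo ahi blo bhi : Nat) :
    pvMeas (alo, ahi, blo, bhi) = (ahi - alo) + (bhi - blo) := rfl

theorem pvStackW_nil : pvStackW [] = 0 := rfl

theorem pvStackW_cons (r : PvReg) (rest : List PvReg) :
    pvStackW (r :: rest) = pvMeas r + 1 + pvStackW rest := by
  simp [pvStackW]

theorem pv_degL (alo blo x y : Nat) (hbi : alo ≤ x) (hbj : blo ≤ y)
    (hp : ¬(alo < x ∧ blo < y)) : alo = x ∨ blo = y := by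
  by_cases h : alo < x
  · have := fun hy => hp ⟨h, hy⟩
    right; omega
  · left; omega

theorem pv_degR (ahi bhi u v : Nat) (hbik : u ≤ ahi) (hbjk : v ≤ bhi)
    (hp : ¬(u < ahi ∧ v < bhi)) : u = ahi ∨ v = bhi := by
  by_cases h : u < ahi
  · have := fun hv => hp ⟨h, hv⟩
    right; omega
  · left; omega

theorem pv_perm_shuffle {α : Type} (acc F IL IR : List α) (s : α) :
    ((acc ++ [s]) ++ (IR ++ (IL ++ F))).Perm (acc ++ ((IL ++ s :: IR) ++ F)) := by
  have core : (s :: (IR ++ IL)).Perm (IL ++ s :: IR) :=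
    (List.Perm.cons s List.perm_append_comm).trans List.perm_middle.symm
  have h1 : (acc ++ [s]) ++ (IR ++ (IL ++ F)) = acc ++ ((s :: (IR ++ IL)) ++ F) := by
    simp [List.append_assoc]
  rw [h1]
  exact List.Perm.append_left acc (List.Perm.append_right F core)

-- the queue loop of get_matching_blocks yields a permutation of the in-order block list
theorem pvMbLoop_perm (a b : List String) :
    ∀ fuel stack acc, (∀ r ∈ stack, pvValid a b r) → pvStackW stack ≤ fuel →
      (pvMbLoop a b (pvRawB2j b) [] fuel stack acc).Perm
        (acc ++ stack.flatMap (fun r => pvInorder a b (pvMeas r + 1) r)) := by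
  intro fuel
  induction fuel with
  | zero =>
      intro stack acc hv hw
      cases stack with
      | nil => simp [pvMbLoop]
      | cons r rest =>
          exfalso
          have hsum : pvStackW (r :: rest) = pvMeas r + 1 + pvStackW rest := by
            simp [pvStackW]
          omega
  | succ f ih =>
      intro stack acc hv hw
      cases stack with
      | nil => simp [pvMbLoop]
      | cons r rest =>
          obtain ⟨alo, ahi, blo, bhi⟩ := r
          have hvr := hv _ (List.mem_cons_self ..)
          obtain ⟨hv1, hv2, hv3⟩ := hvr
          simp only at hv1 hv2 hv3
          simp only [pvMbLoop]
          rw [pvFLM_spec a b alo ahi blo bhi hv2 hv3]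
          have hwcons : pvMeas (alo, ahi, blo, bhi) + 1 + pvStackW rest ≤ f + 1 := by
            simpa [pvStackW] using hw
          simp only [pvMeas] at hwcons
          by_cases hk : (pvSpecBest a b alo ahi blo bhi).2.2 = 0
          · rw [if_neg (by simpa using hk)]
            have hior : pvInorder a b (pvMeas (alo, ahi, blo, bhi) + 1) (alo, ahi, blo, bhi)
                = [] := by
              simp only [pvMeas]
              cases h : (ahi - alo) + (bhi - blo) with
              | zero =>
                  apply pvInorder_degenerate
                  simp only
                  omega
              | succ n =>
                  rw [← h]
                  have : (ahi - alo) + (bhi - blo) > 0 := by omega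
                  simp only [pvInorder]
                  rw [show (ahi - alo) + (bhi - blo) = n + 1 from h]
                  simp only [pvInorder]
                  rw [if_pos hk]
            rw [List.flatMap_cons, hior, List.nil_append]
            exact ih rest acc (fun x hx => hv x (by simp [hx]))
              (by simp only [pvStackW_cons, pvMeas_def] at hw; omega)
          · rw [if_pos (by simpa using hk)]
            obtain ⟨hk1, hbi, hbj, hbik, hbjk⟩ := pvBest_facts a b alo ahi blo bhi hk
            -- the in-order blocks of this window
            have hio : pvInorder a b (pvMeas (alo, ahi, blo, bhi) + 1) (alo, ahi, blo, bhi)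
                = pvInorder a b ((ahi - alo) + (bhi - blo))
                    (alo, (pvSpecBest a b alo ahi blo bhi).1, blo,
                      (pvSpecBest a b alo ahi blo bhi).2.1)
                  ++ pvSpecBest a b alo ahi blo bhi ::
                    pvInorder a b ((ahi - alo) + (bhi - blo))
                      ((pvSpecBest a b alo ahi blo bhi).1 + (pvSpecBest a b alo ahi blo bhi).2.2,
                        ahi,
                        (pvSpecBest a b alo ahi blo bhi).2.1 + (pvSpecBest a b alo ahi blo bhi).2.2,
                        bhi) := by
              rw [show pvMeas (alo, ahi, blo, bhi) + 1 = ((ahi - alo) + (bhi - blo)) + 1 from by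
                simp [pvMeas]]
              simp only [pvInorder]
              rw [if_neg hk]
            have hvL : pvValid a b (alo, (pvSpecBest a b alo ahi blo bhi).1, blo,
                (pvSpecBest a b alo ahi blo bhi).2.1) :=
              ⟨by simpa using hbi, by simpa using hbj, by simp only; omega⟩
            have hvR : pvValid a b ((pvSpecBest a b alo ahi blo bhi).1 +
                (pvSpecBest a b alo ahi blo bhi).2.2, ahi,
                (pvSpecBest a b alo ahi blo bhi).2.1 + (pvSpecBest a b alo ahi blo bhi).2.2,
                bhi) :=
              ⟨by simp only; omega, by simp only; omega, by simp only; omega⟩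
            have hmL : pvMeas (alo, (pvSpecBest a b alo ahi blo bhi).1, blo,
                (pvSpecBest a b alo ahi blo bhi).2.1) + 1 ≤ (ahi - alo) + (bhi - blo) := by
              simp only [pvMeas]; omega
            have hmR : pvMeas ((pvSpecBest a b alo ahi blo bhi).1 +
                (pvSpecBest a b alo ahi blo bhi).2.2, ahi,
                (pvSpecBest a b alo ahi blo bhi).2.1 + (pvSpecBest a b alo ahi blo bhi).2.2,
                bhi) + 1 ≤ (ahi - alo) + (bhi - blo) := by
              simp only [pvMeas]; omega
            rw [List.flatMap_cons, hio,
              pvInorder_stable a b ((ahi - alo) + (bhi - blo)) _ _ hvL hmL (le_refl _),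
              pvInorder_stable a b ((ahi - alo) + (bhi - blo)) _ _ hvR hmR (le_refl _)]
            have hs' : ((pvSpecBest a b alo ahi blo bhi).1,
                (pvSpecBest a b alo ahi blo bhi).2.1,
                (pvSpecBest a b alo ahi blo bhi).2.2) = pvSpecBest a b alo ahi blo bhi := rfl
            rw [hs']
            by_cases hp1 : alo < (pvSpecBest a b alo ahi blo bhi).1 ∧
                blo < (pvSpecBest a b alo ahi blo bhi).2.1
            · rw [if_pos hp1]
              by_cases hp2 : (pvSpecBest a b alo ahi blo bhi).1 +
                  (pvSpecBest a b alo ahi blo bhi).2.2 < ahi ∧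
                  (pvSpecBest a b alo ahi blo bhi).2.1 +
                    (pvSpecBest a b alo ahi blo bhi).2.2 < bhi
              · rw [if_pos hp2]
                refine (ih _ _ ?_ ?_).trans ?_
                · intro x hx
                  rcases List.mem_cons.mp hx with rfl | hx
                  · exact hvR
                  · rcases List.mem_cons.mp hx with rfl | hx
                    · exact hvL
                    · exact hv x (by simp [hx])
                · simp only [pvStackW_cons, pvStackW_nil, pvMeas_def] at hw ⊢
                  omega
                · rw [List.flatMap_cons, List.flatMap_cons]
                  exact pv_perm_shuffle _ _ _ _ _
              · rw [if_neg hp2]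
                rw [pvInorder_degenerate a b _
                  ((pvSpecBest a b alo ahi blo bhi).1 + (pvSpecBest a b alo ahi blo bhi).2.2,
                    ahi,
                    (pvSpecBest a b alo ahi blo bhi).2.1 + (pvSpecBest a b alo ahi blo bhi).2.2,
                    bhi)
                  (by simp only; exact pv_degR ahi bhi _ _ hbik hbjk hp2)]
                refine (ih _ _ ?_ ?_).trans ?_
                · intro x hx
                  rcases List.mem_cons.mp hx with rfl | hx
                  · exact hvL
                  · exact hv x (by simp [hx])
                · simp only [pvStackW_cons, pvStackW_nil, pvMeas_def] at hw ⊢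
                  omega
                · rw [List.flatMap_cons]
                  have := pv_perm_shuffle acc
                    (List.flatMap (fun r => pvInorder a b (pvMeas r + 1) r) rest)
                    (pvInorder a b
                      (pvMeas (alo, (pvSpecBest a b alo ahi blo bhi).1, blo,
                        (pvSpecBest a b alo ahi blo bhi).2.1) + 1)
                      (alo, (pvSpecBest a b alo ahi blo bhi).1, blo,
                        (pvSpecBest a b alo ahi blo bhi).2.1))
                    ([] : List (Nat × Nat × Nat)) (pvSpecBest a b alo ahi blo bhi)
                  simpa using this
            · rw [if_neg hp1]
              rw [pvInorder_degenerate a b _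
                (alo, (pvSpecBest a b alo ahi blo bhi).1, blo,
                  (pvSpecBest a b alo ahi blo bhi).2.1)
                (by simp only; exact pv_degL alo blo _ _ hbi hbj hp1)]
              by_cases hp2 : (pvSpecBest a b alo ahi blo bhi).1 +
                  (pvSpecBest a b alo ahi blo bhi).2.2 < ahi ∧
                  (pvSpecBest a b alo ahi blo bhi).2.1 +
                    (pvSpecBest a b alo ahi blo bhi).2.2 < bhi
              · rw [if_pos hp2]
                refine (ih _ _ ?_ ?_).trans ?_
                · intro x hx
                  rcases List.mem_cons.mp hx with rfl | hx
                  · exact hvR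
                  · exact hv x (by simp [hx])
                · simp only [pvStackW_cons, pvStackW_nil, pvMeas_def] at hw ⊢
                  omega
                · rw [List.flatMap_cons]
                  have := pv_perm_shuffle acc
                    (List.flatMap (fun r => pvInorder a b (pvMeas r + 1) r) rest)
                    ([] : List (Nat × Nat × Nat))
                    (pvInorder a b
                      (pvMeas ((pvSpecBest a b alo ahi blo bhi).1 +
                        (pvSpecBest a b alo ahi blo bhi).2.2, ahi,
                        (pvSpecBest a b alo ahi blo bhi).2.1 +
                          (pvSpecBest a b alo ahi blo bhi).2.2, bhi) + 1)
                      ((pvSpecBest a b alo ahi blo bhi).1 +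
                        (pvSpecBest a b alo ahi blo bhi).2.2, ahi,
                        (pvSpecBest a b alo ahi blo bhi).2.1 +
                          (pvSpecBest a b alo ahi blo bhi).2.2, bhi))
                    (pvSpecBest a b alo ahi blo bhi)
                  simpa using this
              · rw [if_neg hp2]
                rw [pvInorder_degenerate a b _
                  ((pvSpecBest a b alo ahi blo bhi).1 + (pvSpecBest a b alo ahi blo bhi).2.2,
                    ahi,
                    (pvSpecBest a b alo ahi blo bhi).2.1 + (pvSpecBest a b alo ahi blo bhi).2.2,
                    bhi)
                  (by simp only; exact pv_degR ahi bhi _ _ hbik hbjk hp2)]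
                refine (ih _ _ (fun x hx => hv x (by simp [hx])) ?_).trans ?_
                · simp only [pvStackW_cons, pvStackW_nil, pvMeas_def] at hw ⊢
                  omega
                · have := pv_perm_shuffle acc
                    (List.flatMap (fun r => pvInorder a b (pvMeas r + 1) r) rest)
                    ([] : List (Nat × Nat × Nat)) ([] : List (Nat × Nat × Nat))
                    (pvSpecBest a b alo ahi blo bhi)
                  simpa using this

-- ===== sorting =====

theorem pv_insertBy_congr {α : Type} (bf bf' : α → α → Bool) (x : α) :
    ∀ acc, (∀ y ∈ acc, bf x y = bf' x y) →
      PySem.List.insertBy bf x acc = PySem.List.insertBy bf' x acc := by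
  intro acc
  induction acc with
  | nil => intro _; rfl
  | cons y ys ih =>
      intro h
      rw [PySem.List.insertBy, PySem.List.insertBy]
      rw [h y (by simp)]
      split
      · rfl
      · rw [ih (fun z hz => h z (by simp [hz]))]

theorem pv_foldl_insertBy_congr {α : Type} (bf bf' : α → α → Bool) :
    ∀ (xs acc : List α), (∀ p q, p ∈ xs → (q ∈ acc ∨ q ∈ xs) → bf p q = bf' p q) →
      xs.foldl (fun acc x => PySem.List.insertBy bf x acc) acc
        = xs.foldl (fun acc x => PySem.List.insertBy bf' x acc) acc := by
  intro xs
  induction xs with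
  | nil => intro _ _; rfl
  | cons x t ih =>
      intro acc h
      rw [List.foldl_cons, List.foldl_cons]
      rw [pv_insertBy_congr bf bf' x acc (fun y hy => h x y (by simp) (Or.inl hy))]
      apply ih
      intro p q hp hq
      apply h p q (by simp [hp])
      rcases hq with hq | hq
      · rcases (PySem.List.mem_insertBy _ _ _ _).mp hq with rfl | hq
        · exact Or.inr (by simp)
        · exact Or.inl hq
      · exact Or.inr (by simp [hq])

theorem pv_sorted2_eq {α : Type} (xs ys : List α) (k1 : α → Nat) (k2 : α → Nat)
    (hperm : ys.Perm xs) (hlt : ys.Pairwise (fun x y => k1 x < k1 y)) :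
    PySem.List.sorted2 xs k1 k2 false = ys := by
  have hne : ∀ p q, p ∈ xs → q ∈ xs → p ≠ q → k1 p ≠ k1 q := by
    intro p q hp hq hpq
    have hys : List.Pairwise (fun x y : α => k1 x ≠ k1 y) ys := hlt.imp (fun h => ne_of_lt h)
    exact List.Pairwise.forall (fun x y h => h.symm) hys
      (hperm.mem_iff.mpr hp) (hperm.mem_iff.mpr hq) hpq
  have hcongr : PySem.List.sorted2 xs k1 k2 false = PySem.List.sorted xs k1 false := by
    show xs.foldl (fun acc x => PySem.List.insertBy
        (fun a b => decide (k1 a < k1 b) || !decide (k1 b < k1 a) && decide (k2 a < k2 b)) x acc) []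
      = PySem.List.sorted xs k1 false
    rw [PySem.List.sorted_eq_foldl_insertBy]
    apply pv_foldl_insertBy_congr
    intro p q hp hq
    have hq' : q ∈ xs := hq.resolve_left (by simp)
    by_cases hpq : p = q
    · subst hpq
      simp [Nat.lt_irrefl]
    · have hnepq := hne p q hp hq' hpq
      rcases Nat.lt_trichotomy (k1 p) (k1 q) with h | h | h
      · have h2 : ¬ k1 q < k1 p := by omega
        simp [h, h2]
      · exact absurd h hnepq
      · have h2 : ¬ k1 p < k1 q := by omega
        simp [h, h2]
  rw [hcongr]
  exact PySem.List.sorted_eq_of_perm_of_pairwise_lt xs ys k1 hperm hlt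

-- ===== gap extraction =====

theorem pvGl_congr_suffix (b : List String) (out : List (Nat × Nat × Nat))
    {X Y : List (Nat × Nat × Nat)} (h : ∀ pos, pvGl b pos X = pvGl b pos Y) :
    ∀ pos, pvGl b pos (out ++ X) = pvGl b pos (out ++ Y) := by
  induction out with
  | nil => simpa using h
  | cons blk rest ih =>
      intro pos
      obtain ⟨i, j, k⟩ := blk
      simp only [List.cons_append, pvGl]
      rw [ih]

theorem pvSlice_empty (b : List String) (x y : Nat) (h : y ≤ x) : pvSlice b x y = [] := by
  unfold pvSlice
  rw [PySem.List.slice_natCast]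
  rw [show y - x = 0 by omega]
  rfl

-- the collapse fold of get_matching_blocks preserves the gap lines
theorem pvCollapse_gl (b : List String) (term : Nat × Nat × Nat) :
    ∀ (bs : List (Nat × Nat × Nat)) (cur : Nat × Nat × Nat) (out : List (Nat × Nat × Nat)),
      1 ≤ cur.2.2 → (∀ blk ∈ bs, 1 ≤ blk.2.2) →
      ∀ pos, pvGl b pos
          (((fun st => if st.1.2.2 ≠ 0 then st.2 ++ [st.1] else st.2)
            (bs.foldl
              (fun (st : (Nat × Nat × Nat) × List (Nat × Nat × Nat)) blk =>
                if st.1.1 + st.1.2.2 = blk.1 ∧ st.1.2.1 + st.1.2.2 = blk.2.1 then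
                  ((st.1.1, st.1.2.1, st.1.2.2 + blk.2.2), st.2)
                else (blk, if st.1.2.2 ≠ 0 then st.2 ++ [st.1] else st.2))
              (cur, out))) ++ [term])
        = pvGl b pos (out ++ cur :: bs ++ [term]) := by
  intro bs
  induction bs with
  | nil =>
      intro cur out hcur _ pos
      simp only [List.foldl_nil]
      rw [if_pos (by omega)]
  | cons blk rest ih =>
      intro cur out hcur hks pos
      obtain ⟨i1, j1, k1⟩ := cur
      obtain ⟨i2, j2, k2⟩ := blk
      simp only at hcur
      have hk2 : 1 ≤ k2 := by simpa using hks (i2, j2, k2) (by simp)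
      rw [List.foldl_cons]
      by_cases hmerge : i1 + k1 = i2 ∧ j1 + k1 = j2
      · rw [if_pos (by simpa using hmerge)]
        rw [ih (i1, j1, k1 + k2) out (by simp only; omega)
          (fun x hx => hks x (by simp [hx]))]
        obtain ⟨hm1, hm2⟩ := hmerge
        have hXY : ∀ pos', pvGl b pos' ((i1, j1, k1 + k2) :: (rest ++ [term]))
            = pvGl b pos' ((i1, j1, k1) :: (i2, j2, k2) :: (rest ++ [term])) := by
          intro pos'
          simp only [pvGl]
          rw [← hm2, pvSlice_empty b (j1 + k1) (j1 + k1) (le_refl _)]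
          rw [show j1 + (k1 + k2) = j1 + k1 + k2 by omega]
          simp
        have := pvGl_congr_suffix b out hXY pos
        simpa using this
      · rw [if_neg (by simpa using hmerge)]
        rw [if_pos (by simp only; omega)]
        rw [ih (i2, j2, k2) (out ++ [(i1, j1, k1)]) (by simpa using hk2)
          (fun x hx => hks x (by simp [hx]))]
        simp [List.append_assoc]

-- the first collapse step from the (0,0,0) accumulator
theorem pvCollapseFull_gl (b : List String) (term : Nat × Nat × Nat) :
    ∀ (bs : List (Nat × Nat × Nat)), (∀ blk ∈ bs, 1 ≤ blk.2.2) →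
      pvGl b 0
          (((fun st => if st.1.2.2 ≠ 0 then st.2 ++ [st.1] else st.2)
            (bs.foldl
              (fun (st : (Nat × Nat × Nat) × List (Nat × Nat × Nat)) blk =>
                if st.1.1 + st.1.2.2 = blk.1 ∧ st.1.2.1 + st.1.2.2 = blk.2.1 then
                  ((st.1.1, st.1.2.1, st.1.2.2 + blk.2.2), st.2)
                else (blk, if st.1.2.2 ≠ 0 then st.2 ++ [st.1] else st.2))
              ((0, 0, 0), []))) ++ [term])
        = pvGl b 0 (bs ++ [term]) := by
  intro bs hk
  cases bs with
  | nil => simp [pvGl]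
  | cons blk rest =>
      obtain ⟨i2, j2, k2⟩ := blk
      rw [List.foldl_cons]
      have hstep : (if (0 : Nat) + (0 : Nat) = i2 ∧ (0 : Nat) + (0 : Nat) = j2 then
            (((0 : Nat), (0 : Nat), (0 : Nat) + k2), ([] : List (Nat × Nat × Nat)))
          else ((i2, j2, k2), if (0 : Nat) ≠ 0 then [] ++ [((0 : Nat), (0 : Nat), (0 : Nat))] else []))
          = ((i2, j2, k2), ([] : List (Nat × Nat × Nat))) := by
        by_cases hm : (0 : Nat) + (0 : Nat) = i2 ∧ (0 : Nat) + (0 : Nat) = j2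
        · rw [if_pos hm]
          obtain ⟨h1, h2⟩ := hm
          simp [← h1, ← h2]
        · rw [if_neg hm]
          simp
      rw [hstep]
      have := pvCollapse_gl b term rest (i2, j2, k2) []
        (by have := hk (i2, j2, k2) (by simp); simpa using this)
        (fun x hx => hk x (by simp [hx])) 0
      simpa using this

-- gl ignores the first component of a terminal zero block
theorem pvGl_term (b : List String) (x y stop : Nat) :
    ∀ (bs : List (Nat × Nat × Nat)) (pos : Nat),
      pvGl b pos (bs ++ [(x, stop, 0)]) = pvGl b pos (bs ++ [(y, stop, 0)]) := by
  intro bs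
  induction bs with
  | nil => intro pos; simp [pvGl]
  | cons blk rest ih =>
      intro pos
      obtain ⟨i, j, k⟩ := blk
      simp only [List.cons_append, pvGl]
      rw [ih]

-- splitting the gap extraction at a block
theorem pvGl_split (b : List String) (bi bj k stop : Nat) :
    ∀ (xs ys : List (Nat × Nat × Nat)) (pos : Nat),
      pvGl b pos (xs ++ (bi, bj, k) :: ys ++ [(0, stop, 0)])
        = pvGl b pos (xs ++ [(0, bj, 0)]) ++ pvGl b (bj + k) (ys ++ [(0, stop, 0)]) := by
  intro xs
  induction xs with
  | nil => intro ys pos; simp [pvGl]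
  | cons blk rest ih =>
      intro ys pos
      obtain ⟨i, j, kk⟩ := blk
      simp only [List.cons_append, pvGl, ih]
      simp [List.append_assoc]

-- the opcode fold reads exactly the gap lines off a block list
theorem pvOpcodes_gl (b : List String) :
    ∀ (bs : List (Nat × Nat × Nat)) (i j : Nat) (answer : List PvOp),
      ((bs.foldl
        (fun (st : Nat × Nat × List PvOp) blk =>
          let ai := blk.1; let bj := blk.2.1; let size := blk.2.2
          let i := st.1; let j := st.2.1; let answer := st.2.2
          let tag : String :=
            if i < ai ∧ j < bj then "replace"
            else if i < ai then "delete"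
            else if j < bj then "insert"
            else ""
          let answer := if tag ≠ "" then answer ++ [(tag, i, ai, j, bj)] else answer
          let i := ai + size; let j := bj + size
          let answer := if size ≠ 0 then answer ++ [("equal", ai, i, bj, j)] else answer
          (i, j, answer))
        (i, j, answer)).2.2).flatMap (pvContribB b)
      = answer.flatMap (pvContribB b) ++ pvGl b j bs := by
  intro bs
  induction bs with
  | nil => intro i j answer; simp [pvGl]
  | cons blk rest ih =>
      intro i j answer
      obtain ⟨ai, bj, size⟩ := blk
      rw [List.foldl_cons]
      simp only
      rw [ih]
      rw [show pvGl b j ((ai, bj, size) :: rest)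
          = (pvSlice b j bj).flatMap pvGB ++ pvGl b (bj + size) rest from rfl]
      by_cases h1 : i < ai ∧ j < bj
      · rw [if_pos h1, if_pos (show ("replace" : String) ≠ "" by decide)]
        split <;> simp [pvContribB, List.flatMap_append, List.append_assoc]
      · rw [if_neg h1]
        by_cases hi : i < ai
        · have hj : ¬ j < bj := fun hj => h1 ⟨hi, hj⟩
          have hs0 : pvSlice b j bj = [] := pvSlice_empty b j bj (by omega)
          rw [if_pos hi, if_pos (show ("delete" : String) ≠ "" by decide)]
          split <;> simp [pvContribB, List.flatMap_append, List.append_assoc, hs0]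
        · rw [if_neg hi]
          by_cases hj : j < bj
          · rw [if_pos hj, if_pos (show ("insert" : String) ≠ "" by decide)]
            split <;> simp [pvContribB, List.flatMap_append, List.append_assoc]
          · have hs0 : pvSlice b j bj = [] := pvSlice_empty b j bj (by omega)
            rw [if_neg hj, if_neg (show ¬ ("" : String) ≠ "" by decide)]
            split <;> simp [pvContribB, List.flatMap_append, List.append_assoc, hs0]

-- ===== B's worklist equals the gap lines of the in-order blocks =====

theorem pvCollect_gl (a b : List String) :
    ∀ fuel stack acc, (∀ r ∈ stack, pvValid a b r) → pvStackW stack ≤ fuel →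
      pvCollect a b fuel stack acc
        = acc ++ stack.flatMap
            (fun r => pvGl b r.2.2.1 (pvInorder a b (pvMeas r + 1) r ++ [(0, r.2.2.2, 0)])) := by
  intro fuel
  induction fuel with
  | zero =>
      intro stack acc hv hw
      cases stack with
      | nil => simp [pvCollect]
      | cons r rest =>
          exfalso
          have hsum : pvStackW (r :: rest) = pvMeas r + 1 + pvStackW rest := by
            simp [pvStackW]
          omega
  | succ f ih =>
      intro stack acc hv hw
      cases stack with
      | nil => simp [pvCollect]
      | cons r rest =>
          obtain ⟨alo, ahi, blo, bhi⟩ := r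
          have hvr := hv _ (List.mem_cons_self ..)
          obtain ⟨hv1, hv2, hv3⟩ := hvr
          simp only at hv1 hv2 hv3
          simp only [pvCollect]
          rw [pvLcr_spec a b alo ahi blo bhi]
          have hwcons : pvMeas (alo, ahi, blo, bhi) + 1 + pvStackW rest ≤ f + 1 := by
            simpa [pvStackW] using hw
          simp only [pvMeas] at hwcons
          by_cases hk : (pvSpecBest a b alo ahi blo bhi).2.2 = 0
          · rw [if_pos hk]
            have hio : pvInorder a b (pvMeas (alo, ahi, blo, bhi) + 1) (alo, ahi, blo, bhi)
                = [] := by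
              cases hm : pvMeas (alo, ahi, blo, bhi) + 1 with
              | zero => rfl
              | succ n =>
                  simp only [pvInorder]
                  rw [if_pos hk]
            rw [List.flatMap_cons, hio]
            rw [ih rest _ (fun x hx => hv x (by simp [hx]))
              (by simp only [pvStackW_cons, pvMeas_def] at hw; omega)]
            rw [pv_foldl_eq_flatMap _ pvGB (fun acc x => by
              simp only [pvGB]
              split <;> simp)]
            simp only [List.nil_append, pvGl]
            simp [pvSlice, List.append_assoc]
          · rw [if_neg hk]
            obtain ⟨hk1, hbi, hbj, hbik, hbjk⟩ := pvBest_facts a b alo ahi blo bhi hk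
            have hvL : pvValid a b (alo, (pvSpecBest a b alo ahi blo bhi).1, blo,
                (pvSpecBest a b alo ahi blo bhi).2.1) :=
              ⟨by simpa using hbi, by simpa using hbj, by simp only; omega⟩
            have hvR : pvValid a b ((pvSpecBest a b alo ahi blo bhi).1 +
                (pvSpecBest a b alo ahi blo bhi).2.2, ahi,
                (pvSpecBest a b alo ahi blo bhi).2.1 + (pvSpecBest a b alo ahi blo bhi).2.2,
                bhi) :=
              ⟨by simp only; omega, by simp only; omega, by simp only; omega⟩
            rw [ih _ _ ?_ ?_]
            · rw [List.flatMap_cons, List.flatMap_cons, List.flatMap_cons]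
              have hio : pvInorder a b (pvMeas (alo, ahi, blo, bhi) + 1) (alo, ahi, blo, bhi)
                  = pvInorder a b ((ahi - alo) + (bhi - blo))
                      (alo, (pvSpecBest a b alo ahi blo bhi).1, blo,
                        (pvSpecBest a b alo ahi blo bhi).2.1)
                    ++ pvSpecBest a b alo ahi blo bhi ::
                      pvInorder a b ((ahi - alo) + (bhi - blo))
                        ((pvSpecBest a b alo ahi blo bhi).1 +
                          (pvSpecBest a b alo ahi blo bhi).2.2, ahi,
                          (pvSpecBest a b alo ahi blo bhi).2.1 +
                            (pvSpecBest a b alo ahi blo bhi).2.2, bhi) := by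
                rw [show pvMeas (alo, ahi, blo, bhi) + 1 = ((ahi - alo) + (bhi - blo)) + 1 from by
                  simp [pvMeas]]
                simp only [pvInorder]
                rw [if_neg hk]
              rw [hio,
                pvInorder_stable a b ((ahi - alo) + (bhi - blo)) _ _ hvL
                  (by simp only [pvMeas_def]; omega) (le_refl _),
                pvInorder_stable a b ((ahi - alo) + (bhi - blo)) _ _ hvR
                  (by simp only [pvMeas_def]; omega) (le_refl _)]
              simp only
              rw [show (pvSpecBest a b alo ahi blo bhi ::
                  pvInorder a b (pvMeas ((pvSpecBest a b alo ahi blo bhi).1 +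
                      (pvSpecBest a b alo ahi blo bhi).2.2, ahi,
                      (pvSpecBest a b alo ahi blo bhi).2.1 +
                        (pvSpecBest a b alo ahi blo bhi).2.2, bhi) + 1)
                    ((pvSpecBest a b alo ahi blo bhi).1 +
                      (pvSpecBest a b alo ahi blo bhi).2.2, ahi,
                      (pvSpecBest a b alo ahi blo bhi).2.1 +
                        (pvSpecBest a b alo ahi blo bhi).2.2, bhi))
                = ((pvSpecBest a b alo ahi blo bhi).1, (pvSpecBest a b alo ahi blo bhi).2.1,
                    (pvSpecBest a b alo ahi blo bhi).2.2) ::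
                  pvInorder a b (pvMeas ((pvSpecBest a b alo ahi blo bhi).1 +
                      (pvSpecBest a b alo ahi blo bhi).2.2, ahi,
                      (pvSpecBest a b alo ahi blo bhi).2.1 +
                        (pvSpecBest a b alo ahi blo bhi).2.2, bhi) + 1)
                    ((pvSpecBest a b alo ahi blo bhi).1 +
                      (pvSpecBest a b alo ahi blo bhi).2.2, ahi,
                      (pvSpecBest a b alo ahi blo bhi).2.1 +
                        (pvSpecBest a b alo ahi blo bhi).2.2, bhi) from rfl]
              rw [pvGl_split]
              simp [List.append_assoc]
            · intro x hx
              rcases List.mem_cons.mp hx with rfl | hx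
              · exact hvL
              · rcases List.mem_cons.mp hx with rfl | hx
                · exact hvR
                · exact hv x (by simp [hx])
            · simp only [pvStackW_cons, pvStackW_nil, pvMeas_def] at hw ⊢
              omega

-- ===== main assembly =====

theorem pvOpc_eq_collect (a b : List String)
    (h2 : b.length < 200 ∨ ∀ l ∈ b, b.count l ≤ b.length / 100 + 1) :
    (pvGetOpcodes a b).flatMap (pvContribB b)
      = pvCollect a b (a.length + b.length + 1) [(0, a.length, 0, b.length)] [] := by
  have hvfull : pvValid a b (0, a.length, 0, b.length) :=
    ⟨Nat.zero_le _, Nat.zero_le _, le_refl _⟩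
  have hone : ∀ x ∈ [((0 : Nat), a.length, (0 : Nat), b.length)], pvValid a b x := by
    intro x hx
    rcases List.mem_cons.mp hx with rfl | hx
    · exact hvfull
    · simp at hx
  have hmperm := pvMbLoop_perm a b (2 * (a.length + b.length) + 1)
    [(0, a.length, 0, b.length)] [] hone
    (by simp only [pvStackW_cons, pvStackW_nil, pvMeas_def]; omega)
  simp only [List.flatMap_cons, List.flatMap_nil, List.nil_append, List.append_nil] at hmperm
  have hsorted := pvInorder_sorted a b (pvMeas (0, a.length, 0, b.length) + 1) _ hvfull
  have hks : ∀ blk ∈ pvInorder a b (pvMeas (0, a.length, 0, b.length) + 1)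
      (0, a.length, 0, b.length), 1 ≤ blk.2.2 := fun blk hb =>
    (pvInorder_bounds a b _ _ hvfull blk hb).2.2.2.2
  have hs2 := pv_sorted2_eq
    (pvMbLoop a b (pvRawB2j b) [] (2 * (a.length + b.length) + 1)
      [(0, a.length, 0, b.length)] [])
    (pvInorder a b (pvMeas (0, a.length, 0, b.length) + 1) (0, a.length, 0, b.length))
    (fun t => t.1) (fun t => t.2.1) hmperm.symm hsorted
  simp only [pvGetOpcodes, pvGetMatchingBlocks]
  rw [pvChainB_eq_raw b h2]
  rw [hs2]
  rw [pvOpcodes_gl b _ 0 0 []]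
  rw [pvCollapseFull_gl b (a.length, b.length, 0) _ hks]
  rw [pvGl_term b a.length 0 b.length]
  rw [pvCollect_gl a b (a.length + b.length + 1) [(0, a.length, 0, b.length)] [] hone
    (by simp only [pvStackW_cons, pvStackW_nil, pvMeas_def]; omega)]
  simp only [List.flatMap_cons, List.flatMap_nil, List.nil_append, List.append_nil]

-- ===== VERDICT (by name: the statement is the Claim_ definition above) =====
theorem find_lost_content_spec : Claim_equal_find_lost_content := by
  intro old_text new_text _hdom hpre
  unfold Spec_find_lost_content
  rw [pv_A_filter]
  rw [pv_flatMap_congr (fun op _ => pv_contrib_eq _ hpre.1 op)]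
  exact pvOpc_eq_collect (pvSplitNL new_text) (pvSplitNL old_text) hpre.2
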